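-- pv_equiv track=rewrite | github.com/choikeunyoung/algorithm | 프로그래머스/석유_시추.py | solution
-- ===== SOURCE A (Python) =====
-- def solution(land):
--     horizontal_length = len(land[0])
--     vertical_length = len(land)
--     visited = [ [False]*horizontal_length for _ in range(vertical_length) ]
--     direction = [ (0,-1), (-1,0), (0,1), (1,0) ]
--     for i in range(vertical_length):
--         for j in range(horizontal_length):
--             if land[i][j] == 1 and not visited[i][j]:
--                 stack = [(i,j)]
--                 check_list = [(i,j)]
--                 visited[i][j] = True
--                 cnt = 1
--                 while stack:
--                     check = stack.pop()
--                     check_list.append(check)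
--                     for k in range(4):
--                         ny = check[0] + direction[k][0]
--                         nx = check[1] + direction[k][1]
--                         if 0 <= ny < vertical_length and 0 <= nx < horizontal_length:
--                             if land[ny][nx] == 1 and not visited[ny][nx]:
--                                 stack.append((ny,nx))
--                                 visited[ny][nx] = True
--                                 cnt += 1
--
--                 for lists in check_list:
--                     land[lists[0]][lists[1]] = cnt
--     max_cnt = 0
--     for j in range(horizontal_length):
--         last_value = land[0][j]
--         cnt = land[0][j]
--         for i in range(1,vertical_length):
--             if last_value != land[i][j]:
--                 cnt += land[i][j]
--             last_value = land[i][j]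
--         if max_cnt < cnt:
--             max_cnt = cnt
--
--     answer = max_cnt
--     return answer
-- ===== SOURCE B (Python) =====
-- def solution(land):
--     # Jacobi min-label propagation instead of DFS flood fill; mutates land in place like A.
--     n = len(land)
--     m = len(land[0])
--     label = [[i * m + j if land[i][j] == 1 else -1 for j in range(m)] for i in range(n)]
--     for _ in range(n * m):
--         new = [[(min([label[i][j]] + [label[y][x]
--                      for y, x in ((i - 1, j), (i + 1, j), (i, j - 1), (i, j + 1))
--                      if 0 <= y < n and 0 <= x < m and land[y][x] == 1])
--                  if land[i][j] == 1 else -1) for j in range(m)] for i in range(n)]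
--         if new == label:
--             break
--         label = new
--     counts = {}
--     for i in range(n):
--         for j in range(m):
--             if land[i][j] == 1:
--                 counts[label[i][j]] = counts.get(label[i][j], 0) + 1
--     for i in range(n):
--         for j in range(m):
--             if land[i][j] == 1:
--                 land[i][j] = counts[label[i][j]]
--     best = 0
--     for j in range(m):
--         last = land[0][j]
--         cnt = land[0][j]
--         for i in range(1, n):
--             if last != land[i][j]:
--                 cnt += land[i][j]
--             last = land[i][j]
--         if best < cnt:
--             best = cnt
--     return best
-- ===== Notes on version B (the rewrite author's own statement) =====
-- stated objective: alternative
-- what changed: The stack-based DFS flood fill with a visited grid is replaced by Jacobi min-label propagation: every 1-cell starts with its own index as label, labels are repeatedly replaced by the minimum over the cell and its 1-neighbours until stable, and component sizes are then obtained by counting equal labels; the final column scan is unchanged. Both versions mutate land in place identically; the proved equivalence is about the return value.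
import Mathlib
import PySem

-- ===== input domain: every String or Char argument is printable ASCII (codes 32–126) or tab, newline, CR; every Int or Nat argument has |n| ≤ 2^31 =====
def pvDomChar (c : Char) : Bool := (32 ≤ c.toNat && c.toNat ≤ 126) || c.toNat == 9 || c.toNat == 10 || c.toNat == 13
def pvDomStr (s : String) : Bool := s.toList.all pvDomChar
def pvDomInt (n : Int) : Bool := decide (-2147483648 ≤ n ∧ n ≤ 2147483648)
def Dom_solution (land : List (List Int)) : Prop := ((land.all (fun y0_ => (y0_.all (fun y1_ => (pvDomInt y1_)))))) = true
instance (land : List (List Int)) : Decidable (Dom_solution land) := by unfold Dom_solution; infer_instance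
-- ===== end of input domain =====

-- B replaces A's stack DFS flood fill by Jacobi min-label propagation (alternative algorithm, not faster);
-- both Pythons mutate `land` in place identically — the equivalence proved here is about the return value.

-- shared grid helpers (both Pythons index/assign nested lists the same way)
def pvGet (g : List (List Int)) (i j : Nat) : Int := (g.getD i []).getD j 0

def pvSet (g : List (List Int)) (i j : Nat) (v : Int) : List (List Int) :=
  g.set i ((g.getD i []).set j v)

def pvCells (n m : Nat) : List (Nat × Nat) :=
  (List.range n).flatMap (fun i => (List.range m).map (fun j => (i, j)))

-- the column scan both Pythons end with (A's code, reused verbatim by B)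
def pvColScan (g : List (List Int)) (n m : Nat) : Int :=
  (List.range m).foldl (fun best j =>
    let r := (List.range (n - 1)).foldl
      (fun (st : Int × Int) i1 =>
        let v := pvGet g (i1 + 1) j
        (v, if st.1 ≠ v then st.2 + v else st.2))
      (pvGet g 0 j, pvGet g 0 j)
    if best < r.2 then r.2 else best) 0

-- ===== PORT A =====
def pvVis (v : List (List Bool)) (i j : Nat) : Bool := (v.getD i []).getD j false

def pvVisSet (v : List (List Bool)) (i j : Nat) : List (List Bool) :=
  v.set i ((v.getD i []).set j true)

def dirsA : List (Int × Int) := [(0, -1), (-1, 0), (0, 1), (1, 0)]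

-- one neighbour check of A's inner `for k in range(4)` loop (state: stack, visited, cnt)
def floodStepA (land : List (List Int)) (n m : Nat) (y x : Nat)
    (st : List (Nat × Nat) × List (List Bool) × Int) (d : Int × Int) :
    List (Nat × Nat) × List (List Bool) × Int :=
  let ny : Int := (y : Int) + d.1
  let nx : Int := (x : Int) + d.2
  if 0 ≤ ny ∧ ny < (n : Int) ∧ 0 ≤ nx ∧ nx < (m : Int) then
    if pvGet land ny.toNat nx.toNat = 1 ∧ pvVis st.2.1 ny.toNat nx.toNat = false then
      ((ny.toNat, nx.toNat) :: st.1, pvVisSet st.2.1 ny.toNat nx.toNat, st.2.2 + 1)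
    else st
  else st

-- A's `while stack:` loop; the Lean stack list keeps Python's stack reversed (head = top), so
-- `stack.pop()` is the head and `stack.append` is cons — same elements, same pop order.
-- Fuel n*m+1 is an upper bound on the number of iterations (proved below), never reached.
def floodA (land : List (List Int)) (n m : Nat) :
    Nat → List (Nat × Nat) → List (Nat × Nat) → List (List Bool) → Int →
    List (Nat × Nat) × List (List Bool) × Int
  | 0, _, cl, vis, cnt => (cl, vis, cnt)
  | _ + 1, [], cl, vis, cnt => (cl, vis, cnt)
  | fuel + 1, c :: rest, cl, vis, cnt =>
      let st := dirsA.foldl (floodStepA land n m c.1 c.2) (rest, vis, cnt)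
      floodA land n m fuel st.1 (cl ++ [c]) st.2.1 st.2.2

-- body of A's outer double loop (state: land, visited)
def seedStepA (n m : Nat) (st : List (List Int) × List (List Bool)) (c : Nat × Nat) :
    List (List Int) × List (List Bool) :=
  if pvGet st.1 c.1 c.2 = 1 ∧ pvVis st.2 c.1 c.2 = false then
    let r := floodA st.1 n m (n * m + 1) [c] [c] (pvVisSet st.2 c.1 c.2) 1
    (r.1.foldl (fun g p => pvSet g p.1 p.2 r.2.2) st.1, r.2.1)
  else st

def solution (land : List (List Int)) : Int :=
  let m := (land.getD 0 []).length
  let n := land.length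
  let st := (pvCells n m).foldl (seedStepA n m) (land, List.replicate n (List.replicate m false))
  pvColScan st.1 n m

-- ===== PORT B =====
def nbrsB (i j : Nat) : List (Int × Int) :=
  [((i : Int) - 1, (j : Int)), ((i : Int) + 1, (j : Int)),
   ((i : Int), (j : Int) - 1), ((i : Int), (j : Int) + 1)]

def initLabelB (land : List (List Int)) (n m : Nat) : List (List Int) :=
  (List.range n).map fun i => (List.range m).map fun j =>
    if pvGet land i j = 1 then ((i * m + j : Nat) : Int) else -1

-- one Jacobi iteration: every 1-cell takes min of its own and its in-range 1-neighbours' labels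
def stepB (land : List (List Int)) (n m : Nat) (lab : List (List Int)) : List (List Int) :=
  (List.range n).map fun i => (List.range m).map fun j =>
    if pvGet land i j = 1 then
      ((PySem.List.min? (pvGet lab i j ::
          (nbrsB i j).filterMap (fun p =>
            if 0 ≤ p.1 ∧ p.1 < (n : Int) ∧ 0 ≤ p.2 ∧ p.2 < (m : Int) ∧
                pvGet land p.1.toNat p.2.toNat = 1
            then some (pvGet lab p.1.toNat p.2.toNat) else none))
        (fun v => v)).getD (-1))
    else -1

-- B's `for _ in range(n*m)` loop with its `if new == label: break`
def loopB (land : List (List Int)) (n m : Nat) : Nat → List (List Int) → List (List Int)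
  | 0, lab => lab
  | f + 1, lab =>
      let new := stepB land n m lab
      if new = lab then lab else loopB land n m f new

def countsB (land lab : List (List Int)) (n m : Nat) : PySem.Dict Int Int :=
  (pvCells n m).foldl (fun d c =>
    if pvGet land c.1 c.2 = 1 then
      d.insert (pvGet lab c.1 c.2) (d.getD (pvGet lab c.1 c.2) 0 + 1)
    else d) PySem.Dict.empty

def solution_alt (land : List (List Int)) : Int :=
  let n := land.length
  let m := (land.getD 0 []).length
  let lab := loopB land n m (n * m) (initLabelB land n m)
  let counts := countsB land lab n m
  let land2 := (pvCells n m).foldl (fun g c =>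
      if pvGet g c.1 c.2 = 1 then pvSet g c.1 c.2 (counts.getD (pvGet lab c.1 c.2) 0) else g) land
  pvColScan land2 n m

-- ===== PRECONDITION & SPEC =====
-- Pre_ excludes exactly the inputs where Python A raises IndexError: the empty grid (land[0])
-- and grids with a row shorter than row 0 (land[i][j] for j < len(land[0])).
def Pre_solution (land : List (List Int)) : Prop :=
  land ≠ [] ∧ ∀ row ∈ land, (land.headD []).length ≤ row.length
instance (land : List (List Int)) : Decidable (Pre_solution land) := by
  unfold Pre_solution; infer_instance

def pvWitness_solution : List (List Int) := [[1, 0, 1], [1, 1, 0]]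

def Spec_solution (land : List (List Int)) (out : Int) : Prop := out = solution_alt land
instance (land : List (List Int)) (out : Int) : Decidable (Spec_solution land out) := by
  unfold Spec_solution; infer_instance

-- ===== CLAIM (what is proved, stated in full; the proofs are below) =====
def Claim_equal_solution : Prop :=
  ∀ (land : List (List Int)), Dom_solution land → Pre_solution land →
    Spec_solution land (solution land)

-- ===== LEMMAS AND PROOFS =====

-- ---- basic facts about the shared grid helpers ----

theorem mem_pvCells (n m : Nat) (c : Nat × Nat) :
    c ∈ pvCells n m ↔ c.1 < n ∧ c.2 < m := by
  cases c with
  | mk i j =>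
    simp [pvCells, List.mem_flatMap, List.mem_map, List.mem_range]

theorem length_pvCells (n m : Nat) : (pvCells n m).length = n * m := by
  simp [pvCells, List.length_flatMap]

theorem nodup_pvCells (n m : Nat) : (pvCells n m).Nodup := by
  have h : pvCells n m = (List.range n) ×ˢ (List.range m) := rfl
  rw [h]
  exact List.Nodup.product (List.nodup_range) (List.nodup_range)

def gShape (g : List (List Int)) (n m : Nat) : Prop :=
  g.length = n ∧ ∀ row ∈ g, m ≤ row.length

theorem getD_set_self' {α : Type} (l : List α) (i : Nat) (x d : α) (h : i < l.length) :
    (l.set i x).getD i d = x := by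
  rw [List.getD_eq_getElem?_getD, List.getElem?_set_self h]; rfl

theorem getD_set_ne' {α : Type} (l : List α) (i i' : Nat) (x d : α) (h : i ≠ i') :
    (l.set i x).getD i' d = l.getD i' d := by
  rw [List.getD_eq_getElem?_getD, List.getD_eq_getElem?_getD, List.getElem?_set_ne h]

theorem pvGet_set_eq (g : List (List Int)) (n m : Nat) (hs : gShape g n m)
    (i j : Nat) (hi : i < n) (hj : j < m) (v : Int) :
    pvGet (pvSet g i j v) i j = v := by
  obtain ⟨hlen, hrow⟩ := hs
  have hig : i < g.length := hlen ▸ hi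
  have hjr : j < (g.getD i []).length := by
    have : g.getD i [] ∈ g := by
      rw [List.getD_eq_getElem?_getD, List.getElem?_eq_getElem hig]
      exact List.getElem_mem hig
    exact lt_of_lt_of_le hj (hrow _ this)
  unfold pvGet pvSet
  rw [getD_set_self' _ _ _ _ hig, getD_set_self' _ _ _ _ hjr]

theorem pvGet_set_ne (g : List (List Int)) (i j : Nat) (v : Int)
    (i' j' : Nat) (hne : ¬(i = i' ∧ j = j')) :
    pvGet (pvSet g i j v) i' j' = pvGet g i' j' := by
  by_cases hii : i = i'
  · subst hii
    have hjj : j ≠ j' := fun h => hne ⟨rfl, h⟩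
    by_cases hig : i < g.length
    · unfold pvGet pvSet
      rw [getD_set_self' _ _ _ _ hig, getD_set_ne' _ _ _ _ _ hjj]
    · have h0 : g.set i ((g.getD i []).set j v) = g := List.set_eq_of_length_le (by omega)
      unfold pvGet pvSet
      rw [h0]
  · unfold pvGet pvSet
    rw [getD_set_ne' _ _ _ _ _ hii]

theorem gShape_set (g : List (List Int)) (n m : Nat) (hs : gShape g n m)
    (i j : Nat) (v : Int) : gShape (pvSet g i j v) n m := by
  obtain ⟨hlen, hrow⟩ := hs
  by_cases hig : i < g.length
  · refine ⟨by simp [pvSet, hlen], ?_⟩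
    intro row hr
    rcases List.mem_or_eq_of_mem_set hr with h | h
    · exact hrow _ h
    · subst h
      rw [List.length_set]
      refine hrow _ ?_
      rw [List.getD_eq_getElem?_getD, List.getElem?_eq_getElem hig]
      exact List.getElem_mem hig
  · have h0 : pvSet g i j v = g := List.set_eq_of_length_le (by omega)
    rw [h0]; exact ⟨hlen, hrow⟩

def vShape (v : List (List Bool)) (n m : Nat) : Prop :=
  v.length = n ∧ ∀ row ∈ v, row.length = m

theorem pvVis_visSet_eq (v : List (List Bool)) (n m : Nat) (hs : vShape v n m)
    (i j : Nat) (hi : i < n) (hj : j < m) :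
    pvVis (pvVisSet v i j) i j = true := by
  obtain ⟨hlen, hrow⟩ := hs
  have hig : i < v.length := hlen ▸ hi
  have hjr : j < (v.getD i []).length := by
    have : v.getD i [] ∈ v := by
      rw [List.getD_eq_getElem?_getD, List.getElem?_eq_getElem hig]
      exact List.getElem_mem hig
    rw [hrow _ this]; exact hj
  unfold pvVis pvVisSet
  rw [getD_set_self' _ _ _ _ hig, getD_set_self' _ _ _ _ hjr]

theorem pvVis_visSet_ne (v : List (List Bool)) (i j i' j' : Nat)
    (hne : ¬(i = i' ∧ j = j')) :
    pvVis (pvVisSet v i j) i' j' = pvVis v i' j' := by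
  by_cases hii : i = i'
  · subst hii
    have hjj : j ≠ j' := fun h => hne ⟨rfl, h⟩
    by_cases hig : i < v.length
    · unfold pvVis pvVisSet
      rw [getD_set_self' _ _ _ _ hig, getD_set_ne' _ _ _ _ _ hjj]
    · have h0 : v.set i ((v.getD i []).set j true) = v := List.set_eq_of_length_le (by omega)
      unfold pvVis pvVisSet
      rw [h0]
  · unfold pvVis pvVisSet
    rw [getD_set_ne' _ _ _ _ _ hii]

theorem vShape_visSet (v : List (List Bool)) (n m : Nat) (hs : vShape v n m)
    (i j : Nat) : vShape (pvVisSet v i j) n m := by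
  obtain ⟨hlen, hrow⟩ := hs
  by_cases hig : i < v.length
  · refine ⟨by simp [pvVisSet, hlen], ?_⟩
    intro row hr
    rcases List.mem_or_eq_of_mem_set hr with h | h
    · exact hrow _ h
    · subst h
      rw [List.length_set]
      refine hrow _ ?_
      rw [List.getD_eq_getElem?_getD, List.getElem?_eq_getElem hig]
      exact List.getElem_mem hig
  · have h0 : pvVisSet v i j = v := List.set_eq_of_length_le (by omega)
    rw [h0]; exact ⟨hlen, hrow⟩

theorem vShape_replicate (n m : Nat) :
    vShape (List.replicate n (List.replicate m false)) n m := by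
  refine ⟨by simp, ?_⟩
  intro row hr
  rw [List.eq_of_mem_replicate hr]; simp

theorem pvVis_replicate (n m : Nat) (i j : Nat) :
    pvVis (List.replicate n (List.replicate m false)) i j = false := by
  unfold pvVis
  by_cases hi : i < n
  · have h1 : (List.replicate n (List.replicate m false)).getD i [] = List.replicate m false := by
      rw [List.getD_eq_getElem?_getD, List.getElem?_replicate_of_lt hi]; rfl
    rw [h1]
    by_cases hj : j < m
    · rw [List.getD_eq_getElem?_getD, List.getElem?_replicate_of_lt hj]; rfl
    · rw [List.getD_eq_getElem?_getD, List.getElem?_eq_none_iff.mpr (by simpa using hj)]; rfl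
  · rw [show (List.replicate n (List.replicate m false)).getD i [] = [] from by
      rw [List.getD_eq_getElem?_getD, List.getElem?_eq_none_iff.mpr (by simpa using hi)]; rfl]
    rfl


-- the specification both ports are related to: a 1-cell's value is the size of its
-- 4-connected component of 1-cells, every other cell keeps its value
def oneB (G : List (List Int)) (n m : Nat) (c : Nat × Nat) : Bool :=
  decide (c.1 < n) && decide (c.2 < m) && decide (pvGet G c.1 c.2 = 1)

def adjB (G : List (List Int)) (n m : Nat) (c d : Nat × Nat) : Bool :=
  oneB G n m c && oneB G n m d &&
    ((decide (c.1 = d.1) && (decide (c.2 + 1 = d.2) || decide (d.2 + 1 = c.2))) ||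
     (decide (c.2 = d.2) && (decide (c.1 + 1 = d.1) || decide (d.1 + 1 = c.1))))

def reachB (G : List (List Int)) (n m : Nat) : Nat → (Nat × Nat) → (Nat × Nat) → Bool
  | 0, c, d => decide (c = d)
  | k + 1, c, d =>
      reachB G n m k c d || (pvCells n m).any (fun e => adjB G n m c e && reachB G n m k e d)

def specVal (G : List (List Int)) (n m : Nat) (c : Nat × Nat) : Int :=
  if oneB G n m c then
    (((pvCells n m).countP (fun d => reachB G n m (n * m) c d) : Nat) : Int)
  else pvGet G c.1 c.2

-- ---- reachability: reachB is monotone in fuel and stabilises at n*m steps ----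

theorem one_box (G : List (List Int)) (n m : Nat) (c : Nat × Nat)
    (h : oneB G n m c = true) : c.1 < n ∧ c.2 < m ∧ pvGet G c.1 c.2 = 1 := by
  simp only [oneB, Bool.and_eq_true, decide_eq_true_eq] at h
  exact ⟨h.1.1, h.1.2, h.2⟩

theorem reachB_zero_iff (G : List (List Int)) (n m : Nat) (c d : Nat × Nat) :
    reachB G n m 0 c d = true ↔ c = d := by
  simp [reachB]

theorem reachB_succ_iff (G : List (List Int)) (n m : Nat) (k : Nat) (c d : Nat × Nat) :
    reachB G n m (k + 1) c d = true ↔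
      reachB G n m k c d = true ∨
        ∃ e ∈ pvCells n m, adjB G n m c e = true ∧ reachB G n m k e d = true := by
  rw [reachB]
  simp only [Bool.or_eq_true, List.any_eq_true, Bool.and_eq_true]

theorem adj_one (G : List (List Int)) (n m : Nat) (c d : Nat × Nat)
    (h : adjB G n m c d = true) : oneB G n m c = true ∧ oneB G n m d = true := by
  simp only [adjB, Bool.and_eq_true] at h
  exact ⟨h.1.1, h.1.2⟩

theorem adj_symm (G : List (List Int)) (n m : Nat) (c d : Nat × Nat)
    (h : adjB G n m c d = true) : adjB G n m d c = true := by
  simp only [adjB, Bool.and_eq_true, Bool.or_eq_true, decide_eq_true_eq] at h ⊢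
  tauto

theorem reachB_succ (G : List (List Int)) (n m : Nat) (k : Nat) (c d : Nat × Nat)
    (h : reachB G n m k c d = true) : reachB G n m (k + 1) c d = true :=
  (reachB_succ_iff G n m k c d).mpr (Or.inl h)

theorem reachB_mono (G : List (List Int)) (n m : Nat) {k k' : Nat} (hk : k ≤ k')
    (c d : Nat × Nat) (h : reachB G n m k c d = true) : reachB G n m k' c d = true := by
  induction k' with
  | zero => simpa [Nat.le_zero.mp hk] using h
  | succ t ih =>
    rcases Nat.lt_or_ge k (t + 1) with h1 | h1
    · exact reachB_succ _ _ _ _ _ _ (ih (by omega))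
    · have : k = t + 1 := by omega
      subst this; exact h

theorem reachB_self (G : List (List Int)) (n m : Nat) (k : Nat) (c : Nat × Nat) :
    reachB G n m k c c = true := by
  induction k with
  | zero => simp [reachB]
  | succ t ih => exact reachB_succ _ _ _ _ _ _ ih

theorem reachB_box (G : List (List Int)) (n m : Nat) (k : Nat) (c d : Nat × Nat)
    (h : reachB G n m k c d = true) : d = c ∨ oneB G n m d = true := by
  induction k generalizing c with
  | zero => left; exact ((reachB_zero_iff G n m c d).mp h).symm
  | succ t ih =>
    rcases (reachB_succ_iff G n m t c d).mp h with h | ⟨e, _, hadj, hr⟩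
    · exact ih c h
    · rcases ih e hr with h1 | h1
      · subst h1; exact Or.inr (adj_one _ _ _ _ _ hadj).2
      · exact Or.inr h1

theorem reachB_head (G : List (List Int)) (n m : Nat) (k : Nat) (c e d : Nat × Nat)
    (hadj : adjB G n m c e = true) (h : reachB G n m k e d = true) :
    reachB G n m (k + 1) c d = true := by
  refine (reachB_succ_iff G n m k c d).mpr (Or.inr ⟨e, ?_, hadj, h⟩)
  have h1 := one_box G n m e (adj_one _ _ _ _ _ hadj).2
  exact (mem_pvCells n m e).mpr ⟨h1.1, h1.2.1⟩

theorem reachB_snoc (G : List (List Int)) (n m : Nat) (k : Nat) (c e d : Nat × Nat)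
    (h : reachB G n m k c e = true) (hadj : adjB G n m e d = true) :
    reachB G n m (k + 1) c d = true := by
  induction k generalizing c with
  | zero =>
    have : c = e := (reachB_zero_iff G n m c e).mp h
    subst this
    have h1 := one_box G n m d (adj_one _ _ _ _ _ hadj).2
    exact (reachB_succ_iff G n m 0 c d).mpr
      (Or.inr ⟨d, (mem_pvCells n m d).mpr ⟨h1.1, h1.2.1⟩, hadj, (reachB_zero_iff G n m d d).mpr rfl⟩)
  | succ t ih =>
    rcases (reachB_succ_iff G n m t c e).mp h with h | ⟨e', he', hadj', hr⟩
    · exact reachB_succ _ _ _ _ _ _ (ih c h)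
    · exact reachB_head _ _ _ _ _ _ _ hadj' (ih e' hr)

theorem reachB_decomp (G : List (List Int)) (n m : Nat) (k : Nat) (c d : Nat × Nat)
    (h : reachB G n m (k + 1) c d = true) :
    reachB G n m k c d = true ∨
      ∃ e, reachB G n m k c e = true ∧ adjB G n m e d = true := by
  induction k generalizing c with
  | zero =>
    rcases (reachB_succ_iff G n m 0 c d).mp h with h | ⟨e, _, hadj, hr⟩
    · exact Or.inl h
    · have : e = d := (reachB_zero_iff G n m e d).mp hr
      subst this
      exact Or.inr ⟨c, (reachB_zero_iff G n m c c).mpr rfl, hadj⟩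
  | succ t ih =>
    rcases (reachB_succ_iff G n m (t + 1) c d).mp h with h | ⟨e, he, hadj, hr⟩
    · rcases ih  c (by exact h) with h1 | ⟨e, h1, h2⟩
      · exact Or.inl (reachB_succ _ _ _ _ _ _ h1)
      · exact Or.inr ⟨e, reachB_succ _ _ _ _ _ _ h1, h2⟩
    · rcases ih e hr with h1 | ⟨f, h1, h2⟩
      · exact Or.inl (reachB_head _ _ _ _ _ _ _ hadj h1)
      · exact Or.inr ⟨f, reachB_head _ _ _ _ _ _ _ hadj h1, h2⟩

theorem reachB_stable_ge (G : List (List Int)) (n m : Nat) (k : Nat) (c : Nat × Nat)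
    (hstab : ∀ d, reachB G n m (k + 1) c d = true ↔ reachB G n m k c d = true)
    {j : Nat} (hj : k ≤ j) :
    ∀ d, reachB G n m j c d = true ↔ reachB G n m k c d = true := by
  induction j with
  | zero => have : k = 0 := by omega
            subst this; intro d; rfl
  | succ t ih =>
    rcases Nat.lt_or_ge k (t + 1) with h1 | h1
    · have ht := ih (by omega)
      intro d
      rcases Nat.eq_or_lt_of_le (by omega : k ≤ t) with h2 | h2
      · subst h2; exact hstab d
      · -- k < t : levels t and t+1 agree because all levels from k agree
        have hstep : ∀ d, reachB G n m (t + 1) c d = true ↔ reachB G n m t c d = true := by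
          intro d'
          constructor
          · intro h
            rcases reachB_decomp _ _ _ _ _ _ h with hh | ⟨e, hh, hadj⟩
            · exact hh
            · have he : reachB G n m k c e = true := (ih (by omega) e).mp hh
              have : reachB G n m (k + 1) c d' = true := reachB_snoc _ _ _ _ _ _ _ he hadj
              exact reachB_mono _ _ _ (by omega : k ≤ t) _ _ ((hstab d').mp this)
          · exact reachB_succ _ _ _ _ _ _
        exact ((hstep d).trans (ht d))
    · have : k = t + 1 := by omega
      subst this; intro d; rfl

-- counting helpers
theorem countP_mono_pt {α : Type} (l : List α) (p q : α → Bool)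
    (h : ∀ a ∈ l, p a = true → q a = true) : l.countP p ≤ l.countP q := by
  induction l with
  | nil => simp
  | cons x t ih =>
    have ht := ih (fun a ha => h a (List.mem_cons_of_mem _ ha))
    by_cases hx : p x = true
    · rw [List.countP_cons_of_pos hx, List.countP_cons_of_pos (h x (List.mem_cons_self) hx)]
      omega
    · rw [List.countP_cons_of_neg (by simpa using hx)]
      by_cases hq : q x = true
      · rw [List.countP_cons_of_pos hq]; omega
      · rw [List.countP_cons_of_neg (by simpa using hq)]; omega

theorem countP_strict {α : Type} (l : List α) (p q : α → Bool)
    (h : ∀ a ∈ l, p a = true → q a = true) (x : α) (hx : x ∈ l)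
    (hqx : q x = true) (hpx : p x = false) : l.countP p < l.countP q := by
  induction l with
  | nil => simp at hx
  | cons y t ih =>
    have ht := countP_mono_pt t p q (fun a ha => h a (List.mem_cons_of_mem _ ha))
    rcases List.mem_cons.mp hx with h1 | h1
    · subst h1
      rw [List.countP_cons_of_neg (by simp [hpx]), List.countP_cons_of_pos hqx]
      omega
    · have := ih (fun a ha => h a (List.mem_cons_of_mem _ ha)) h1
      by_cases hy : p y = true
      · rw [List.countP_cons_of_pos hy, List.countP_cons_of_pos (h y (List.mem_cons_self) hy)]
        omega
      · rw [List.countP_cons_of_neg (by simpa using hy)]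
        by_cases hqy : q y = true
        · rw [List.countP_cons_of_pos hqy]; omega
        · rw [List.countP_cons_of_neg (by simpa using hqy)]; omega

theorem countP_single_of_nodup {α : Type} [DecidableEq α] (l : List α) (hl : l.Nodup)
    (c : α) (hc : c ∈ l) : l.countP (fun d => decide (c = d)) = 1 := by
  induction l with
  | nil => simp at hc
  | cons y t ih =>
    rcases List.mem_cons.mp hc with h1 | h1
    · subst h1
      rw [List.countP_cons_of_pos (by simp)]
      have : t.countP (fun d => decide (c = d)) = 0 := by
        rw [List.countP_eq_zero]
        intro a ha
        simp only [decide_eq_true_eq]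
        intro hca; subst hca
        exact (List.nodup_cons.mp hl).1 ha
      omega
    · have hyne : ¬ (c = y) := by
        intro h; subst h; exact (List.nodup_cons.mp hl).1 h1
      rw [List.countP_cons_of_neg (by simpa using hyne)]
      exact ih (List.nodup_cons.mp hl).2 h1

theorem reachB_collapse (G : List (List Int)) (n m : Nat) (c : Nat × Nat)
    (hc : oneB G n m c = true) (j : Nat) (d : Nat × Nat)
    (h : reachB G n m j c d = true) : reachB G n m (n * m) c d = true := by
  -- find a stabilisation level k < n*m by pigeonhole on the reach-set size
  have hbox := one_box G n m c hc
  have hcmem : c ∈ pvCells n m := (mem_pvCells n m c).mpr ⟨hbox.1, hbox.2.1⟩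
  have grow : ∀ k : Nat, (∀ j' < k, ¬ (∀ d, reachB G n m (j' + 1) c d = true ↔ reachB G n m j' c d = true)) →
      k + 1 ≤ (pvCells n m).countP (fun d => reachB G n m k c d) := by
    intro k
    induction k with
    | zero =>
      intro _
      have : (pvCells n m).countP (fun d => reachB G n m 0 c d) = 1 := by
        have : (pvCells n m).countP (fun d => reachB G n m 0 c d)
            = (pvCells n m).countP (fun d => decide (c = d)) := by
          apply List.countP_congr
          intro a _
          simp [reachB, eq_comm]
        rw [this]
        exact countP_single_of_nodup _ (nodup_pvCells n m) c hcmem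
      omega
    | succ t ih =>
      intro hall
      have h1 := ih (fun j' hj' => hall j' (by omega))
      have hnst := hall t (by omega)
      push_neg at hnst
      obtain ⟨d0, hd0⟩ := hnst
      have hmono : reachB G n m t c d0 = true → reachB G n m (t + 1) c d0 = true :=
        fun hh => reachB_succ G n m t c d0 hh
      have hd1 : reachB G n m (t + 1) c d0 = true ∧ reachB G n m t c d0 = false := by
        rcases hd0 with ⟨h2, h3⟩ | ⟨h2, h3⟩
        · exact ⟨h2, by simpa using h3⟩
        · exact absurd (hmono h3) h2
      have hd0mem : d0 ∈ pvCells n m := by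
        rcases reachB_box G n m (t + 1) c d0 hd1.1 with h2 | h2
        · rw [h2] at hd1; exact absurd (reachB_self G n m t c) (by simp [hd1.2])
        · have := one_box G n m d0 h2
          exact (mem_pvCells n m d0).mpr ⟨this.1, this.2.1⟩
      have := countP_strict (pvCells n m) (fun d => reachB G n m t c d)
        (fun d => reachB G n m (t + 1) c d)
        (fun a _ => reachB_succ G n m t c a) d0 hd0mem hd1.1 hd1.2
      omega
  by_cases hst : ∃ k < n * m, ∀ d, reachB G n m (k + 1) c d = true ↔ reachB G n m k c d = true
  · obtain ⟨k, hk, hstab⟩ := hst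
    by_cases hj : j ≤ n * m
    · exact reachB_mono _ _ _ hj _ _ h
    · exact (reachB_stable_ge G n m k c hstab (by omega : k ≤ n * m) d).mpr
        ((reachB_stable_ge G n m k c hstab (by omega : k ≤ j) d).mp h)
  · have := grow (n * m) (fun j' hj' hiff => hst ⟨j', hj', hiff⟩)
    have hle := List.countP_le_length (l := pvCells n m) (p := fun d => reachB G n m (n * m) c d)
    rw [length_pvCells] at hle
    omega


theorem scan_congr (g1 g2 : List (List Int)) (n m : Nat) (hn : 0 < n)
    (h : ∀ i j, i < n → j < m → pvGet g1 i j = pvGet g2 i j) :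
    pvColScan g1 n m = pvColScan g2 n m := by
  unfold pvColScan
  apply List.foldl_ext
  intro best j hj
  rw [List.mem_range] at hj
  have : ∀ st : Int × Int,
      (List.range (n - 1)).foldl (fun (st : Int × Int) i1 =>
        (pvGet g1 (i1 + 1) j, if st.1 ≠ pvGet g1 (i1 + 1) j then st.2 + pvGet g1 (i1 + 1) j else st.2)) st
      = (List.range (n - 1)).foldl (fun (st : Int × Int) i1 =>
        (pvGet g2 (i1 + 1) j, if st.1 ≠ pvGet g2 (i1 + 1) j then st.2 + pvGet g2 (i1 + 1) j else st.2)) st := by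
    intro st
    apply List.foldl_ext
    intro st' i1 hi1
    rw [List.mem_range] at hi1
    rw [h (i1 + 1) j (by omega) hj]
  simp only [h 0 j hn hj, this]

-- ---- port B: Jacobi min-label propagation computes min component index ----

def idxI (m : Nat) (c : Nat × Nat) : Int := ((c.1 * m + c.2 : Nat) : Int)

theorem idxI_inj (m : Nat) (c d : Nat × Nat) (hc : c.2 < m) (hd : d.2 < m)
    (h : idxI m c = idxI m d) : c = d := by
  unfold idxI at h
  have hm : 0 < m := Nat.lt_of_le_of_lt (Nat.zero_le _) hc
  have h2 : c.1 * m + c.2 = d.1 * m + d.2 := by exact_mod_cast h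
  have e1 : (c.1 * m + c.2) / m = c.1 := by
    rw [Nat.mul_comm c.1 m, Nat.mul_add_div hm, Nat.div_eq_of_lt hc, Nat.add_zero]
  have e2 : (c.1 * m + c.2) % m = c.2 := by
    rw [Nat.mul_comm c.1 m, Nat.mul_add_mod, Nat.mod_eq_of_lt hc]
  have f1 : (d.1 * m + d.2) / m = d.1 := by
    rw [Nat.mul_comm d.1 m, Nat.mul_add_div hm, Nat.div_eq_of_lt hd, Nat.add_zero]
  have f2 : (d.1 * m + d.2) % m = d.2 := by
    rw [Nat.mul_comm d.1 m, Nat.mul_add_mod, Nat.mod_eq_of_lt hd]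
  refine Prod.ext ?_ ?_
  · rw [← e1, ← f1, h2]
  · rw [← e2, ← f2, h2]
theorem reachP_of_reachB (G : List (List Int)) (n m k : Nat) (c d : Nat × Nat)
    (h : reachB G n m k c d = true) :
    Relation.ReflTransGen (fun a b => adjB G n m a b = true) c d := by
  induction k generalizing c with
  | zero => rw [(reachB_zero_iff G n m c d).mp h]
  | succ t ih =>
    rcases (reachB_succ_iff G n m t c d).mp h with h | ⟨e, _, hadj, hr⟩
    · exact ih c h
    · exact Relation.ReflTransGen.head hadj (ih e hr)

theorem reachB_of_reachP (G : List (List Int)) (n m : Nat) (c d : Nat × Nat)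
    (hc : oneB G n m c = true)
    (h : Relation.ReflTransGen (fun a b => adjB G n m a b = true) c d) :
    reachB G n m (n * m) c d = true := by
  induction h with
  | refl => exact reachB_self G n m (n * m) c
  | @tail b e h1 h2 ih =>
    exact reachB_collapse G n m c hc (n * m + 1) e (reachB_snoc G n m (n * m) c b e ih h2)
theorem reachB_symmT (G : List (List Int)) (n m : Nat) (c d : Nat × Nat)
    (_hc : oneB G n m c = true) (h : reachB G n m (n * m) c d = true) :
    reachB G n m (n * m) d c = true := by
  rcases reachB_box G n m (n * m) c d h with h1 | hd
  · rw [h1]; exact reachB_self G n m (n * m) c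
  · exact reachB_of_reachP G n m d c hd
      (Relation.ReflTransGen.symmetric (fun a b hab => adj_symm G n m a b hab)
        (reachP_of_reachB G n m (n * m) c d h))

theorem reachB_transT (G : List (List Int)) (n m : Nat) (c d e : Nat × Nat)
    (hc : oneB G n m c = true) (h1 : reachB G n m (n * m) c d = true)
    (h2 : reachB G n m (n * m) d e = true) : reachB G n m (n * m) c e = true :=
  reachB_of_reachP G n m c e hc
    ((reachP_of_reachB G n m (n * m) c d h1).trans (reachP_of_reachB G n m (n * m) d e h2))

theorem pvGet_grid_map (f : Nat → Nat → Int) (n m i j : Nat) (hi : i < n) (hj : j < m) :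
    pvGet ((List.range n).map fun i => (List.range m).map fun j => f i j) i j = f i j := by
  have h1 : ((List.range n).map fun i => (List.range m).map fun j => f i j).getD i []
      = (List.range m).map fun j => f i j := by
    rw [List.getD_eq_getElem?_getD, List.getElem?_map, List.getElem?_range hi]; rfl
  have h2 : ((List.range m).map fun j => f i j).getD j 0 = f i j := by
    rw [List.getD_eq_getElem?_getD, List.getElem?_map, List.getElem?_range hj]; rfl
  unfold pvGet
  rw [h1, h2]
-- the pure value of B's label grid after k Jacobi rounds
def labF (G : List (List Int)) (n m : Nat) : Nat → (Nat × Nat) → Int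
  | 0, c => if pvGet G c.1 c.2 = 1 then ((c.1 * m + c.2 : Nat) : Int) else -1
  | k + 1, c =>
      if pvGet G c.1 c.2 = 1 then
        ((PySem.List.min? (labF G n m k c ::
            (nbrsB c.1 c.2).filterMap (fun p =>
              if 0 ≤ p.1 ∧ p.1 < (n : Int) ∧ 0 ≤ p.2 ∧ p.2 < (m : Int) ∧
                  pvGet G p.1.toNat p.2.toNat = 1
              then some (labF G n m k (p.1.toNat, p.2.toNat)) else none))
          (fun v => v)).getD (-1))
      else -1

theorem stepB_get (G : List (List Int)) (n m : Nat) (L : List (List Int)) (i j : Nat)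
    (hi : i < n) (hj : j < m) :
    pvGet (stepB G n m L) i j =
      if pvGet G i j = 1 then
        ((PySem.List.min? (pvGet L i j ::
            (nbrsB i j).filterMap (fun p =>
              if 0 ≤ p.1 ∧ p.1 < (n : Int) ∧ 0 ≤ p.2 ∧ p.2 < (m : Int) ∧
                  pvGet G p.1.toNat p.2.toNat = 1
              then some (pvGet L p.1.toNat p.2.toNat) else none))
          (fun v => v)).getD (-1))
      else -1 := by
  unfold stepB
  exact pvGet_grid_map _ n m i j hi hj

theorem labF_succ (G : List (List Int)) (n m k : Nat) (i j : Nat) :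
    labF G n m (k + 1) (i, j) =
      if pvGet G i j = 1 then
        ((PySem.List.min? (labF G n m k (i, j) ::
            (nbrsB i j).filterMap (fun p =>
              if 0 ≤ p.1 ∧ p.1 < (n : Int) ∧ 0 ≤ p.2 ∧ p.2 < (m : Int) ∧
                  pvGet G p.1.toNat p.2.toNat = 1
              then some (labF G n m k (p.1.toNat, p.2.toNat)) else none))
          (fun v => v)).getD (-1))
      else -1 := rfl

theorem iter_get (G : List (List Int)) (n m : Nat) :
    ∀ k i j, i < n → j < m →
      pvGet ((stepB G n m)^[k] (initLabelB G n m)) i j = labF G n m k (i, j) := by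
  intro k
  induction k with
  | zero =>
    intro i j hi hj
    simp only [Function.iterate_zero, id]
    unfold initLabelB
    rw [pvGet_grid_map _ n m i j hi hj]
    rfl
  | succ t ih =>
    intro i j hi hj
    rw [Function.iterate_succ_apply', stepB_get G n m _ i j hi hj, labF_succ G n m t i j]
    by_cases hone : pvGet G i j = 1
    · rw [if_pos hone, if_pos hone]
      have hhead := ih i j hi hj
      have htail : (nbrsB i j).filterMap (fun p =>
            if 0 ≤ p.1 ∧ p.1 < (n : Int) ∧ 0 ≤ p.2 ∧ p.2 < (m : Int) ∧
                pvGet G p.1.toNat p.2.toNat = 1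
            then some (pvGet ((stepB G n m)^[t] (initLabelB G n m)) p.1.toNat p.2.toNat)
            else none)
          = (nbrsB i j).filterMap (fun p =>
            if 0 ≤ p.1 ∧ p.1 < (n : Int) ∧ 0 ≤ p.2 ∧ p.2 < (m : Int) ∧
                pvGet G p.1.toNat p.2.toNat = 1
            then some (labF G n m t (p.1.toNat, p.2.toNat)) else none) := by
        apply List.filterMap_congr
        intro p _
        by_cases hg : 0 ≤ p.1 ∧ p.1 < (n : Int) ∧ 0 ≤ p.2 ∧ p.2 < (m : Int) ∧
            pvGet G p.1.toNat p.2.toNat = 1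
        · rw [if_pos hg, if_pos hg, ih p.1.toNat p.2.toNat (by omega) (by omega)]
        · rw [if_neg hg, if_neg hg]
      rw [hhead, htail]
    · rw [if_neg hone, if_neg hone]
theorem loopB_eq (G : List (List Int)) (n m : Nat) :
    ∀ (f : Nat) (L : List (List Int)), loopB G n m f L = (stepB G n m)^[f] L := by
  intro f
  induction f with
  | zero => intro L; rfl
  | succ t ih =>
    intro L
    show (let new := stepB G n m L; if new = L then L else loopB G n m t new) = _
    by_cases h : stepB G n m L = L
    · simp only [h]
      exact (Function.iterate_fixed h (t + 1)).symm
    · simp only [if_neg h]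
      rw [ih (stepB G n m L), ← Function.iterate_succ_apply]

theorem minfold_le_init (t : List Int) (x : Int) : t.foldl min x ≤ x := by
  induction t generalizing x with
  | nil => exact le_refl x
  | cons a t ih => exact le_trans (ih (min x a)) (min_le_left x a)

theorem minfold_le_mem (t : List Int) : ∀ x y, y ∈ t → t.foldl min x ≤ y := by
  induction t with
  | nil => intro x y h; simp at h
  | cons a t ih =>
    intro x y h
    rcases List.mem_cons.mp h with rfl | h2
    · exact le_trans (minfold_le_init t (min x y)) (min_le_right x y)
    · exact ih (min x a) y h2

theorem minfold_le (t : List Int) (x y : Int) (h : y = x ∨ y ∈ t) : t.foldl min x ≤ y := by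
  rcases h with rfl | h
  · exact minfold_le_init t y
  · exact minfold_le_mem t x y h
theorem minfold_mem (t : List Int) (x : Int) : t.foldl min x = x ∨ t.foldl min x ∈ t := by
  induction t generalizing x with
  | nil => exact Or.inl rfl
  | cons a t ih =>
    rcases ih (min x a) with h | h
    · rcases min_choice x a with h1 | h1
      · exact Or.inl (by rw [List.foldl_cons, h, h1])
      · exact Or.inr (by rw [List.foldl_cons, h, h1]; exact List.mem_cons_self)
    · exact Or.inr (List.mem_cons_of_mem _ h)

-- B's candidate guard picks out exactly the adjacent 1-cells
theorem cand_of_adj (G : List (List Int)) (n m : Nat) (i j : Nat)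
    (e : Nat × Nat) (hadj : adjB G n m (i, j) e = true) (f : Nat × Nat → Int) :
    f e ∈ (nbrsB i j).filterMap (fun p =>
      if 0 ≤ p.1 ∧ p.1 < (n : Int) ∧ 0 ≤ p.2 ∧ p.2 < (m : Int) ∧
          pvGet G p.1.toNat p.2.toNat = 1
      then some (f (p.1.toNat, p.2.toNat)) else none) := by
  obtain ⟨e1, e2⟩ := e
  have h1 := one_box G n m (e1, e2) (adj_one _ _ _ _ _ hadj).2
  simp only [adjB, Bool.and_eq_true, Bool.or_eq_true, decide_eq_true_eq] at hadj
  obtain ⟨-, harith⟩ := hadj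
  rw [List.mem_filterMap]
  rcases harith with ⟨hr, hcol | hcol⟩ | ⟨hcv, hrr | hrr⟩
  · refine ⟨((i : Int), (j : Int) + 1), by simp [nbrsB], ?_⟩
    rw [if_pos ⟨by omega, by omega, by omega, by omega, by
      rw [show ((i : Int), (j : Int) + 1).1.toNat = e1 from by simp only []; omega,
          show ((i : Int), (j : Int) + 1).2.toNat = e2 from by simp only []; omega]
      exact h1.2.2⟩]
    rw [show (((i : Int), (j : Int) + 1).1.toNat, ((i : Int), (j : Int) + 1).2.toNat)
        = (e1, e2) from by simp only [Prod.ext_iff]; constructor <;> omega]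
  · refine ⟨((i : Int), (j : Int) - 1), by simp [nbrsB], ?_⟩
    rw [if_pos ⟨by omega, by omega, by omega, by omega, by
      rw [show ((i : Int), (j : Int) - 1).1.toNat = e1 from by simp only []; omega,
          show ((i : Int), (j : Int) - 1).2.toNat = e2 from by simp only []; omega]
      exact h1.2.2⟩]
    rw [show (((i : Int), (j : Int) - 1).1.toNat, ((i : Int), (j : Int) - 1).2.toNat)
        = (e1, e2) from by simp only [Prod.ext_iff]; constructor <;> omega]
  · refine ⟨((i : Int) + 1, (j : Int)), by simp [nbrsB], ?_⟩
    rw [if_pos ⟨by omega, by omega, by omega, by omega, by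
      rw [show ((i : Int) + 1, (j : Int)).1.toNat = e1 from by simp only []; omega,
          show ((i : Int) + 1, (j : Int)).2.toNat = e2 from by simp only []; omega]
      exact h1.2.2⟩]
    rw [show (((i : Int) + 1, (j : Int)).1.toNat, ((i : Int) + 1, (j : Int)).2.toNat)
        = (e1, e2) from by simp only [Prod.ext_iff]; constructor <;> omega]
  · refine ⟨((i : Int) - 1, (j : Int)), by simp [nbrsB], ?_⟩
    rw [if_pos ⟨by omega, by omega, by omega, by omega, by
      rw [show ((i : Int) - 1, (j : Int)).1.toNat = e1 from by simp only []; omega,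
          show ((i : Int) - 1, (j : Int)).2.toNat = e2 from by simp only []; omega]
      exact h1.2.2⟩]
    rw [show (((i : Int) - 1, (j : Int)).1.toNat, ((i : Int) - 1, (j : Int)).2.toNat)
        = (e1, e2) from by simp only [Prod.ext_iff]; constructor <;> omega]
theorem adj_of_cand (G : List (List Int)) (n m : Nat) (i j : Nat)
    (hone : oneB G n m (i, j) = true) (f : Nat × Nat → Int) (y : Int)
    (hy : y ∈ (nbrsB i j).filterMap (fun p =>
      if 0 ≤ p.1 ∧ p.1 < (n : Int) ∧ 0 ≤ p.2 ∧ p.2 < (m : Int) ∧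
          pvGet G p.1.toNat p.2.toNat = 1
      then some (f (p.1.toNat, p.2.toNat)) else none)) :
    ∃ e, adjB G n m (i, j) e = true ∧ y = f e := by
  rw [List.mem_filterMap] at hy
  obtain ⟨p, hp, hpy⟩ := hy
  by_cases hg : 0 ≤ p.1 ∧ p.1 < (n : Int) ∧ 0 ≤ p.2 ∧ p.2 < (m : Int) ∧
      pvGet G p.1.toNat p.2.toNat = 1
  · rw [if_pos hg] at hpy
    refine ⟨(p.1.toNat, p.2.toNat), ?_, (Option.some.injEq _ _ ▸ hpy).symm⟩
    have hob := one_box G n m (i, j) hone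
    simp only [nbrsB, List.mem_cons, List.not_mem_nil, or_false] at hp
    simp only [adjB, oneB, Bool.and_eq_true, Bool.or_eq_true, decide_eq_true_eq]
    obtain ⟨hg1, hg2, hg3, hg4, hg5⟩ := hg
    refine ⟨⟨⟨⟨hob.1, hob.2.1⟩, hob.2.2⟩, ⟨⟨?_, ?_⟩, hg5⟩⟩, ?_⟩
    · omega
    · omega
    · rcases hp with hp | hp | hp | hp <;> rw [hp] at hg1 hg2 hg3 hg4 ⊢ <;>
        [exact Or.inr ⟨by omega, Or.inr (by omega)⟩;
         exact Or.inr ⟨by omega, Or.inl (by omega)⟩;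
         exact Or.inl ⟨by omega, Or.inr (by omega)⟩;
         exact Or.inl ⟨by omega, Or.inl (by omega)⟩]
  · rw [if_neg hg] at hpy; exact absurd hpy (by simp)

theorem labF_inv (G : List (List Int)) (n m : Nat) :
    ∀ k c, oneB G n m c = true →
      (∀ d, reachB G n m k c d = true → labF G n m k c ≤ idxI m d) ∧
      (∃ d, reachB G n m k c d = true ∧ labF G n m k c = idxI m d) := by
  intro k
  induction k with
  | zero =>
    intro c hc
    obtain ⟨c1, c2⟩ := c
    have hob := one_box G n m (c1, c2) hc
    have hval : labF G n m 0 (c1, c2) = idxI m (c1, c2) := by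
      show (if pvGet G c1 c2 = 1 then ((c1 * m + c2 : Nat) : Int) else -1) = _
      rw [if_pos hob.2.2]; rfl
    constructor
    · intro d hd
      rw [← (reachB_zero_iff G n m (c1, c2) d).mp hd, hval]
    · exact ⟨(c1, c2), (reachB_zero_iff G n m _ _).mpr rfl, hval⟩
  | succ t ih =>
    intro c hc
    obtain ⟨c1, c2⟩ := c
    have hob := one_box G n m (c1, c2) hc
    have hval : labF G n m (t + 1) (c1, c2)
        = ((nbrsB c1 c2).filterMap (fun p =>
            if 0 ≤ p.1 ∧ p.1 < (n : Int) ∧ 0 ≤ p.2 ∧ p.2 < (m : Int) ∧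
                pvGet G p.1.toNat p.2.toNat = 1
            then some (labF G n m t (p.1.toNat, p.2.toNat)) else none)).foldl min
            (labF G n m t (c1, c2)) := by
      rw [labF_succ G n m t c1 c2, if_pos hob.2.2, PySem.List.min?_id_cons]
      rfl
    constructor
    · intro d hd
      rcases (reachB_succ_iff G n m t (c1, c2) d).mp hd with hd | ⟨e, _, hadj, hr⟩
      · rw [hval]
        exact le_trans (minfold_le _ _ _ (Or.inl rfl)) ((ih (c1, c2) hc).1 d hd)
      · rw [hval]
        exact le_trans
          (minfold_le _ _ _ (Or.inr (cand_of_adj G n m c1 c2 e hadj (labF G n m t))))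
          ((ih e (adj_one _ _ _ _ _ hadj).2).1 d hr)
    · rw [hval]
      rcases minfold_mem _ (labF G n m t (c1, c2)) with hm | hm
      · obtain ⟨d0, hr0, he0⟩ := (ih (c1, c2) hc).2
        exact ⟨d0, reachB_succ _ _ _ _ _ _ hr0, by rw [hm, he0]⟩
      · obtain ⟨e, hadj, hye⟩ := adj_of_cand G n m c1 c2 hc (labF G n m t) _ hm
        obtain ⟨d0, hr0, he0⟩ := (ih e (adj_one _ _ _ _ _ hadj).2).2
        exact ⟨d0, reachB_head _ _ _ _ _ _ _ hadj hr0, by rw [hye, he0]⟩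

theorem labF_eq_iff (G : List (List Int)) (n m : Nat) (c d : Nat × Nat)
    (hc : oneB G n m c = true) (hd : oneB G n m d = true) :
    labF G n m (n * m) c = labF G n m (n * m) d ↔ reachB G n m (n * m) c d = true := by
  obtain ⟨P1c, P2c⟩ := labF_inv G n m (n * m) c hc
  obtain ⟨P1d, P2d⟩ := labF_inv G n m (n * m) d hd
  constructor
  · intro heq
    obtain ⟨r, hcr, hce⟩ := P2c
    obtain ⟨r', hdr, hde⟩ := P2d
    have hrm : r.2 < m := by
      rcases reachB_box G n m _ c r hcr with h1 | h1
      · rw [h1]; exact (one_box _ _ _ _ hc).2.1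
      · exact (one_box _ _ _ _ h1).2.1
    have hrm' : r'.2 < m := by
      rcases reachB_box G n m _ d r' hdr with h1 | h1
      · rw [h1]; exact (one_box _ _ _ _ hd).2.1
      · exact (one_box _ _ _ _ h1).2.1
    have hrr : r = r' := idxI_inj m r r' hrm hrm' (by rw [← hce, ← hde, heq])
    exact reachB_transT G n m c r d hc hcr (hrr ▸ reachB_symmT G n m d r' hd hdr)
  · intro hr
    obtain ⟨r', hdr', hde⟩ := P2d
    obtain ⟨r, hcr, hce⟩ := P2c
    have h1 : labF G n m (n * m) c ≤ labF G n m (n * m) d := by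
      rw [hde]; exact P1c r' (reachB_transT G n m c d r' hc hr hdr')
    have h2 : labF G n m (n * m) d ≤ labF G n m (n * m) c := by
      rw [hce]
      exact P1d r (reachB_transT G n m d c r hd (reachB_symmT G n m c d hc hr) hcr)
    exact le_antisymm h1 h2

theorem countsB_eq_counter (G lab : List (List Int)) (n m : Nat) :
    countsB G lab n m = PySem.Dict.counter
      (((pvCells n m).filter (fun c => decide (pvGet G c.1 c.2 = 1))).map
        (fun c => pvGet lab c.1 c.2)) := by
  unfold countsB
  rw [← PySem.Dict.foldl_insert_getD_add_one_eq_counter, List.foldl_map, List.foldl_filter]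
  apply List.foldl_ext
  intro acc c _
  by_cases h : pvGet G c.1 c.2 = 1
  · simp [h]
  · simp [h]

theorem count_map_filter (l : List (Nat × Nat)) (p : Nat × Nat → Bool)
    (f : Nat × Nat → Int) (v : Int) :
    List.count v ((l.filter p).map f) = l.countP (fun c => p c && decide (f c = v)) := by
  induction l with
  | nil => rfl
  | cons a t ih =>
    by_cases hp : p a = true
    · by_cases hv : f a = v
      · simp [hp, hv, ih]
      · simp [hp, hv, ih]
    · simp [hp, ih]

theorem writeFold_get (n m : Nat) (fv : Nat × Nat → Int) :
    ∀ (l : List (Nat × Nat)) (g : List (List Int)), l.Nodup →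
      (∀ c ∈ l, c.1 < n ∧ c.2 < m) → gShape g n m → ∀ i j, i < n → j < m →
      pvGet (l.foldl (fun g c => if pvGet g c.1 c.2 = 1 then pvSet g c.1 c.2 (fv c) else g) g) i j
        = if (i, j) ∈ l ∧ pvGet g i j = 1 then fv (i, j) else pvGet g i j := by
  intro l
  induction l with
  | nil => intro g _ _ _ i j hi hj; simp
  | cons x t ih =>
    intro g hnd hsub hs i j hi hj
    rw [List.foldl_cons]
    have hs' : gShape (if pvGet g x.1 x.2 = 1 then pvSet g x.1 x.2 (fv x) else g) n m := by
      split
      · exact gShape_set g n m hs x.1 x.2 _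
      · exact hs
    rw [ih _ (List.nodup_cons.mp hnd).2 (fun c hc => hsub c (List.mem_cons_of_mem _ hc))
      hs' i j hi hj]
    by_cases hmem : (i, j) ∈ t
    · have hxne : x ≠ (i, j) := fun h => (List.nodup_cons.mp hnd).1 (h ▸ hmem)
      have hgg : pvGet (if pvGet g x.1 x.2 = 1 then pvSet g x.1 x.2 (fv x) else g) i j
          = pvGet g i j := by
        split
        · exact pvGet_set_ne g x.1 x.2 _ i j
            (fun hcon => hxne (Prod.ext hcon.1 hcon.2))
        · rfl
      rw [hgg]
      by_cases h1 : pvGet g i j = 1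
      · rw [if_pos ⟨hmem, h1⟩, if_pos ⟨List.mem_cons_of_mem _ hmem, h1⟩]
      · rw [if_neg (fun hcon => h1 hcon.2), if_neg (fun hcon => h1 hcon.2)]
    · by_cases hx : x = (i, j)
      · subst hx
        rw [if_neg (fun hcon => hmem hcon.1)]
        by_cases h1 : pvGet g i j = 1
        · have hv : pvGet (if pvGet g i j = 1 then pvSet g i j (fv (i, j)) else g) i j
              = fv (i, j) := by
            rw [if_pos h1]; exact pvGet_set_eq g n m hs i j hi hj _
          rw [hv, if_pos ⟨List.mem_cons_self, h1⟩]
        · have hv : pvGet (if pvGet g i j = 1 then pvSet g i j (fv (i, j)) else g) i j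
              = pvGet g i j := by rw [if_neg h1]
          rw [hv, if_neg (fun hcon => h1 hcon.2)]
      · have hgg : pvGet (if pvGet g x.1 x.2 = 1 then pvSet g x.1 x.2 (fv x) else g) i j
            = pvGet g i j := by
          split
          · exact pvGet_set_ne g x.1 x.2 _ i j
              (fun hcon => hx (Prod.ext hcon.1 hcon.2))
          · rfl
        rw [hgg, if_neg (fun hcon => hmem hcon.1), if_neg ?_]
        intro hcon
        rcases List.mem_cons.mp hcon.1 with h | h
        · exact hx h.symm
        · exact hmem h

theorem gridB_main (G : List (List Int)) (n m : Nat) (hG : gShape G n m)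
    (i j : Nat) (hi : i < n) (hj : j < m) :
    pvGet ((pvCells n m).foldl (fun g c =>
        if pvGet g c.1 c.2 = 1 then
          pvSet g c.1 c.2 ((countsB G (loopB G n m (n * m) (initLabelB G n m)) n m).getD
            (pvGet (loopB G n m (n * m) (initLabelB G n m)) c.1 c.2) 0)
        else g) G) i j = specVal G n m (i, j) := by
  have hlab : ∀ a b, a < n → b < m →
      pvGet (loopB G n m (n * m) (initLabelB G n m)) a b = labF G n m (n * m) (a, b) := by
    intro a b ha hb; rw [loopB_eq, iter_get G n m (n * m) a b ha hb]
  rw [writeFold_get n m _ (pvCells n m) G (nodup_pvCells n m)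
    (fun c hc => (mem_pvCells n m c).mp hc) hG i j hi hj]
  by_cases h1 : pvGet G i j = 1
  · rw [if_pos ⟨(mem_pvCells n m (i, j)).mpr ⟨hi, hj⟩, h1⟩]
    have hone : oneB G n m (i, j) = true := by simp [oneB, hi, hj, h1]
    rw [hlab i j hi hj, countsB_eq_counter, PySem.Dict.getD_counter, count_map_filter]
    unfold specVal
    rw [if_pos hone]
    congr 1
    apply List.countP_congr
    intro d hd
    obtain ⟨hd1, hd2⟩ := (mem_pvCells n m d).mp hd
    constructor
    · intro hh
      simp only [Bool.and_eq_true, decide_eq_true_eq] at hh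
      have honed : oneB G n m d = true := by simp [oneB, hd1, hd2, hh.1]
      have hlabeq : labF G n m (n * m) d = labF G n m (n * m) (i, j) := by
        rw [← hlab d.1 d.2 hd1 hd2]; exact hh.2
      exact reachB_symmT G n m d (i, j) honed ((labF_eq_iff G n m d (i, j) honed hone).mp hlabeq)
    · intro hr
      rcases reachB_box G n m (n * m) (i, j) d hr with hdc | honed
      · rw [hdc]
        simp only [Bool.and_eq_true, decide_eq_true_eq]
        exact ⟨h1, hlab i j hi hj⟩
      · simp only [Bool.and_eq_true, decide_eq_true_eq]
        refine ⟨(one_box G n m d honed).2.2, ?_⟩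
        rw [hlab d.1 d.2 hd1 hd2]
        exact (labF_eq_iff G n m d (i, j) honed hone).mpr
          (reachB_symmT G n m (i, j) d hone hr)
  · rw [if_neg (fun hcon => h1 hcon.2)]
    unfold specVal
    rw [if_neg (by simp [oneB, h1])]


-- ---- port A: the stack flood fill marks exactly one connected component ----

theorem oneP_of_reach (G : List (List Int)) (n m : Nat) (s c : Nat × Nat)
    (hs : oneB G n m s = true)
    (h : Relation.ReflTransGen (fun a b => adjB G n m a b = true) s c) :
    oneB G n m c = true := by
  induction h with
  | refl => exact hs
  | @tail b e _ h2 _ => exact (adj_one _ _ _ _ _ h2).2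

theorem countP_or_disjoint {α : Type} (l : List α) (p q : α → Bool)
    (hdis : ∀ a ∈ l, ¬(p a = true ∧ q a = true)) :
    l.countP (fun a => p a || q a) = l.countP p + l.countP q := by
  induction l with
  | nil => rfl
  | cons x t ih =>
    have ht := ih (fun a ha => hdis a (List.mem_cons_of_mem _ ha))
    have hx := hdis x List.mem_cons_self
    rw [List.countP_cons, List.countP_cons, List.countP_cons, ht]
    by_cases hp : p x = true
    · have hq : ¬ q x = true := fun hq => hx ⟨hp, hq⟩
      simp [hp, hq]
      omega
    · by_cases hq : q x = true
      · simp [hp, hq]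
        omega
      · simp [hp, hq]

theorem adj_target (G : List (List Int)) (n m : Nat) (y x : Nat) (e : Nat × Nat)
    (h : adjB G n m (y, x) e = true) :
    ∃ d ∈ dirsA, ((y : Int) + d.1).toNat = e.1 ∧ ((x : Int) + d.2).toNat = e.2 ∧
      0 ≤ (y : Int) + d.1 ∧ 0 ≤ (x : Int) + d.2 := by
  simp only [adjB, Bool.and_eq_true, Bool.or_eq_true, decide_eq_true_eq] at h
  obtain ⟨-, harith⟩ := h
  rcases harith with ⟨hr, hc | hc⟩ | ⟨hc, hr | hr⟩
  · exact ⟨(0, 1), by simp [dirsA], by omega, by omega, by omega, by omega⟩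
  · exact ⟨(0, -1), by simp [dirsA], by omega, by omega, by omega, by omega⟩
  · exact ⟨(1, 0), by simp [dirsA], by omega, by omega, by omega, by omega⟩
  · exact ⟨(-1, 0), by simp [dirsA], by omega, by omega, by omega, by omega⟩

-- facts relating the state before and after part of A's neighbour loop
def SRel (G : List (List Int)) (n m : Nat) (c : Nat × Nat)
    (a b : List (Nat × Nat) × List (List Bool) × Int) : Prop :=
  vShape b.2.1 n m ∧
  (∀ p : Nat × Nat, pvVis a.2.1 p.1 p.2 = true → pvVis b.2.1 p.1 p.2 = true) ∧
  (∀ p : Nat × Nat, pvVis b.2.1 p.1 p.2 = true →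
    pvVis a.2.1 p.1 p.2 = true ∨ (adjB G n m c p = true ∧ p ∈ b.1)) ∧
  (∀ p, p ∈ a.1 → p ∈ b.1) ∧
  (∀ p : Nat × Nat, p ∈ b.1 →
    p ∈ a.1 ∨ (pvVis b.2.1 p.1 p.2 = true ∧ pvVis a.2.1 p.1 p.2 = false)) ∧
  b.2.2 = a.2.2 +
    (((pvCells n m).countP (fun p => pvVis b.2.1 p.1 p.2 && !pvVis a.2.1 p.1 p.2) : Nat) : Int) ∧
  b.1.length + (pvCells n m).countP (fun p => !pvVis b.2.1 p.1 p.2)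
    = a.1.length + (pvCells n m).countP (fun p => !pvVis a.2.1 p.1 p.2)

theorem SRel_comp (G : List (List Int)) (n m : Nat) (c : Nat × Nat)
    (a b t : List (Nat × Nat) × List (List Bool) × Int)
    (h1 : SRel G n m c a b) (h2 : SRel G n m c b t) : SRel G n m c a t := by
  obtain ⟨s1, m1, n1, u1, w1, c1, f1⟩ := h1
  obtain ⟨s2, m2, n2, u2, w2, c2, f2⟩ := h2
  refine ⟨s2, fun p hp => m2 p (m1 p hp), ?_, fun p hp => u2 p (u1 p hp), ?_, ?_, ?_⟩
  · intro p hp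
    rcases n2 p hp with hp2 | ⟨hadj, hmem⟩
    · rcases n1 p hp2 with hp1 | ⟨hadj, hmem⟩
      · exact Or.inl hp1
      · exact Or.inr ⟨hadj, u2 p hmem⟩
    · exact Or.inr ⟨hadj, hmem⟩
  · intro p hp
    rcases w2 p hp with hp2 | ⟨hv, hnv⟩
    · rcases w1 p hp2 with hp1 | ⟨hv, hnv⟩
      · exact Or.inl hp1
      · exact Or.inr ⟨m2 p hv, hnv⟩
    · refine Or.inr ⟨hv, ?_⟩
      by_cases hav : pvVis a.2.1 p.1 p.2 = true
      · exact absurd (m1 p hav) (by simp [hnv])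
      · simpa using hav
  · have hsplit : (pvCells n m).countP (fun p => pvVis t.2.1 p.1 p.2 && !pvVis a.2.1 p.1 p.2)
        = (pvCells n m).countP (fun p => pvVis b.2.1 p.1 p.2 && !pvVis a.2.1 p.1 p.2)
          + (pvCells n m).countP (fun p => pvVis t.2.1 p.1 p.2 && !pvVis b.2.1 p.1 p.2) := by
      rw [← countP_or_disjoint _ _ _ (by
        intro p _ hcon
        obtain ⟨hl, hr⟩ := hcon
        simp only [Bool.and_eq_true, Bool.not_eq_eq_eq_not, Bool.not_true] at hl hr
        exact absurd hl.1 (by simp [hr.2]))]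
      apply List.countP_congr
      intro p _
      simp only [Bool.and_eq_true, Bool.or_eq_true, Bool.not_eq_eq_eq_not, Bool.not_true]
      constructor
      · intro hh
        by_cases hbv : pvVis b.2.1 p.1 p.2 = true
        · exact Or.inl ⟨hbv, hh.2⟩
        · exact Or.inr ⟨hh.1, by simpa using hbv⟩
      · intro hh
        rcases hh with ⟨hv, hnv⟩ | ⟨hv, hnv⟩
        · exact ⟨m2 p hv, hnv⟩
        · refine ⟨hv, ?_⟩
          by_cases hav : pvVis a.2.1 p.1 p.2 = true
          · exact absurd (m1 p hav) (by simp [hnv])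
          · simpa using hav
    rw [c2, c1, hsplit]
    push_cast
    ring
  · omega

theorem floodStepA_spec (G landC : List (List Int)) (n m : Nat) (vis0 : List (List Bool))
    (HC : ∀ p : Nat × Nat, p.1 < n → p.2 < m → pvVis vis0 p.1 p.2 = false →
      pvGet landC p.1 p.2 = pvGet G p.1 p.2)
    (y x : Nat) (hone : oneB G n m (y, x) = true)
    (d : Int × Int) (hd : d = (0, -1) ∨ d = (-1, 0) ∨ d = (0, 1) ∨ d = (1, 0))
    (st : List (Nat × Nat)) (vis : List (List Bool)) (cnt : Int)
    (hsh : vShape vis n m)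
    (hsub : ∀ p : Nat × Nat, pvVis vis0 p.1 p.2 = true → pvVis vis p.1 p.2 = true) :
    SRel G n m (y, x) (st, vis, cnt) (floodStepA landC n m y x (st, vis, cnt) d) ∧
      (∀ e : Nat × Nat, adjB G n m (y, x) e = true →
        ((y : Int) + d.1).toNat = e.1 → ((x : Int) + d.2).toNat = e.2 →
        0 ≤ (y : Int) + d.1 → 0 ≤ (x : Int) + d.2 →
        pvVis (floodStepA landC n m y x (st, vis, cnt) d).2.1 e.1 e.2 = true) := by
  have hzero : (pvCells n m).countP
      (fun p => pvVis vis p.1 p.2 && !pvVis vis p.1 p.2) = 0 := by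
    rw [List.countP_eq_zero]
    intro p _
    simp
  unfold floodStepA
  by_cases hbnd : 0 ≤ (y : Int) + d.1 ∧ (y : Int) + d.1 < (n : Int) ∧
      0 ≤ (x : Int) + d.2 ∧ (x : Int) + d.2 < (m : Int)
  · rw [if_pos hbnd]
    by_cases hgd : pvGet landC ((y : Int) + d.1).toNat ((x : Int) + d.2).toNat = 1 ∧
        pvVis vis ((y : Int) + d.1).toNat ((x : Int) + d.2).toNat = false
    · rw [if_pos hgd]
      obtain ⟨ey, hey⟩ : ∃ ey, ((y : Int) + d.1).toNat = ey := ⟨_, rfl⟩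
      obtain ⟨ex, hex⟩ : ∃ ex, ((x : Int) + d.2).toNat = ex := ⟨_, rfl⟩
      rw [hey, hex] at hgd ⊢
      have hvne : pvVis vis ey ex = false := hgd.2
      have hnv0 : pvVis vis0 ey ex = false := by
        cases h : pvVis vis0 ey ex
        · rfl
        · exact absurd (hsub (ey, ex) h) (by simp [hvne])
      have hG1 : pvGet G ey ex = 1 := by
        rw [← HC (ey, ex) (by omega) (by omega) hnv0]
        exact hgd.1
      have hadj : adjB G n m (y, x) (ey, ex) = true := by
        simp only [adjB, oneB, Bool.and_eq_true, Bool.or_eq_true, decide_eq_true_eq]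
        have hob := one_box G n m (y, x) hone
        refine ⟨⟨⟨⟨hob.1, hob.2.1⟩, hob.2.2⟩, ⟨⟨by omega, by omega⟩, hG1⟩⟩, ?_⟩
        rcases hd with rfl | rfl | rfl | rfl
        · exact Or.inl ⟨by omega, Or.inr (by omega)⟩
        · exact Or.inr ⟨by omega, Or.inr (by omega)⟩
        · exact Or.inl ⟨by omega, Or.inl (by omega)⟩
        · exact Or.inr ⟨by omega, Or.inl (by omega)⟩
      have hvse : pvVis (pvVisSet vis ey ex) ey ex = true :=
        pvVis_visSet_eq vis n m hsh ey ex (by omega) (by omega)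
      have hvsne : ∀ p : Nat × Nat, p ≠ (ey, ex) →
          pvVis (pvVisSet vis ey ex) p.1 p.2 = pvVis vis p.1 p.2 := by
        intro p hp
        exact pvVis_visSet_ne vis ey ex p.1 p.2
          (fun hcon => hp (Prod.ext hcon.1.symm hcon.2.symm))
      have hcount1 : (pvCells n m).countP
          (fun p => pvVis (pvVisSet vis ey ex) p.1 p.2 && !pvVis vis p.1 p.2) = 1 := by
        rw [List.countP_congr (q := fun p => decide ((ey, ex) = p)) ?_]
        · exact countP_single_of_nodup _ (nodup_pvCells n m) (ey, ex)
            ((mem_pvCells n m (ey, ex)).mpr ⟨by omega, by omega⟩)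
        · intro p _
          simp only [Bool.and_eq_true, Bool.not_eq_eq_eq_not, Bool.not_true, decide_eq_true_eq]
          constructor
          · intro hh
            by_contra hne
            rw [hvsne p (fun hcon => hne hcon.symm)] at hh
            simp [hh.2] at hh
          · intro hh
            rw [← hh]
            exact ⟨hvse, hvne⟩
      have hcountn : (pvCells n m).countP (fun p => !pvVis vis p.1 p.2)
          = (pvCells n m).countP (fun p => !pvVis (pvVisSet vis ey ex) p.1 p.2) + 1 := by
        rw [← hcount1, ← countP_or_disjoint _ _ _ (by
          intro p _ hcon
          obtain ⟨hl, hr⟩ := hcon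
          simp only [Bool.and_eq_true, Bool.not_eq_eq_eq_not, Bool.not_true] at hl hr
          exact absurd hr.1 (by simp [hl]))]
        apply List.countP_congr
        intro p _
        simp only [Bool.not_eq_eq_eq_not, Bool.not_true, Bool.or_eq_true, Bool.and_eq_true]
        constructor
        · intro hh
          by_cases hpe : p = (ey, ex)
          · subst hpe
            exact Or.inr ⟨hvse, hh⟩
          · exact Or.inl (by rw [hvsne p hpe]; exact hh)
        · intro hh
          rcases hh with hh | hh
          · by_cases hpe : p = (ey, ex)
            · subst hpe
              simp [hvse] at hh
            · rwa [hvsne p hpe] at hh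
          · exact hh.2
      refine ⟨⟨vShape_visSet vis n m hsh ey ex, ?_, ?_, ?_, ?_, ?_, ?_⟩, ?_⟩
      · intro p hp
        by_cases hpe : p = (ey, ex)
        · subst hpe; exact hvse
        · rw [hvsne p hpe]; exact hp
      · intro p hp
        by_cases hpe : p = (ey, ex)
        · subst hpe
          exact Or.inr ⟨hadj, List.mem_cons_self⟩
        · rw [hvsne p hpe] at hp; exact Or.inl hp
      · exact fun p hp => List.mem_cons_of_mem _ hp
      · intro p hp
        rcases List.mem_cons.mp hp with rfl | hp
        · exact Or.inr ⟨hvse, hvne⟩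
        · exact Or.inl hp
      · show cnt + 1 = cnt + _
        rw [hcount1]
        norm_num
      · show ((ey, ex) :: st).length
            + (pvCells n m).countP (fun p => !pvVis (pvVisSet vis ey ex) p.1 p.2)
            = st.length + (pvCells n m).countP (fun p => !pvVis vis p.1 p.2)
        rw [List.length_cons]
        omega
      · intro e _ he1 he2 _ _
        have h1 : e.1 = ey := by omega
        have h2 : e.2 = ex := by omega
        rw [show e = (ey, ex) from Prod.ext h1 h2]
        exact hvse
    · rw [if_neg hgd]
      refine ⟨⟨hsh, fun p hp => hp, fun p hp => Or.inl hp, fun p hp => hp,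
        fun p hp => Or.inl hp, by show cnt = cnt + _; rw [hzero]; norm_num, rfl⟩, ?_⟩
      intro e hadj he1 he2 _ _
      cases hv : pvVis vis e.1 e.2
      · exfalso
        apply hgd
        rw [he1, he2]
        have hnv0 : pvVis vis0 e.1 e.2 = false := by
          cases h : pvVis vis0 e.1 e.2
          · rfl
          · exact absurd (hsub e h) (by simp [hv])
        have hob := one_box G n m e (adj_one _ _ _ _ _ hadj).2
        constructor
        · rw [HC e hob.1 hob.2.1 hnv0]
          exact hob.2.2
        · exact hv
      · rfl
  · rw [if_neg hbnd]
    refine ⟨⟨hsh, fun p hp => hp, fun p hp => Or.inl hp, fun p hp => hp,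
      fun p hp => Or.inl hp, by show cnt = cnt + _; rw [hzero]; norm_num, rfl⟩, ?_⟩
    intro e hadj he1 he2 hnn1 hnn2
    exfalso
    have hob := one_box G n m e (adj_one _ _ _ _ _ hadj).2
    exact hbnd ⟨hnn1, by omega, hnn2, by omega⟩


theorem floodDirs_spec (G landC : List (List Int)) (n m : Nat) (vis0 : List (List Bool))
    (HC : ∀ p : Nat × Nat, p.1 < n → p.2 < m → pvVis vis0 p.1 p.2 = false →
      pvGet landC p.1 p.2 = pvGet G p.1 p.2)
    (y x : Nat) (hone : oneB G n m (y, x) = true)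
    (st : List (Nat × Nat)) (vis : List (List Bool)) (cnt : Int)
    (hsh : vShape vis n m)
    (hsub : ∀ p : Nat × Nat, pvVis vis0 p.1 p.2 = true → pvVis vis p.1 p.2 = true) :
    SRel G n m (y, x) (st, vis, cnt) (dirsA.foldl (floodStepA landC n m y x) (st, vis, cnt)) ∧
      (∀ e : Nat × Nat, adjB G n m (y, x) e = true →
        pvVis (dirsA.foldl (floodStepA landC n m y x) (st, vis, cnt)).2.1 e.1 e.2 = true) := by
  obtain ⟨E1, C1⟩ := floodStepA_spec G landC n m vis0 HC y x hone (0, -1)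
    (Or.inl rfl) st vis cnt hsh hsub
  have hsub1 : ∀ p : Nat × Nat, pvVis vis0 p.1 p.2 = true →
      pvVis (floodStepA landC n m y x (st, vis, cnt) (0, -1)).2.1 p.1 p.2 = true :=
    fun p hp => E1.2.1 p (hsub p hp)
  obtain ⟨E2, C2⟩ := floodStepA_spec G landC n m vis0 HC y x hone (-1, 0)
    (Or.inr (Or.inl rfl))
    (floodStepA landC n m y x (st, vis, cnt) (0, -1)).1
    (floodStepA landC n m y x (st, vis, cnt) (0, -1)).2.1
    (floodStepA landC n m y x (st, vis, cnt) (0, -1)).2.2 E1.1 hsub1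
  have hsub2 : ∀ p : Nat × Nat, pvVis vis0 p.1 p.2 = true →
      pvVis (floodStepA landC n m y x (floodStepA landC n m y x (st, vis, cnt) (0, -1))
        (-1, 0)).2.1 p.1 p.2 = true :=
    fun p hp => E2.2.1 p (hsub1 p hp)
  obtain ⟨E3, C3⟩ := floodStepA_spec G landC n m vis0 HC y x hone (0, 1)
    (Or.inr (Or.inr (Or.inl rfl)))
    (floodStepA landC n m y x (floodStepA landC n m y x (st, vis, cnt) (0, -1)) (-1, 0)).1
    (floodStepA landC n m y x (floodStepA landC n m y x (st, vis, cnt) (0, -1)) (-1, 0)).2.1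
    (floodStepA landC n m y x (floodStepA landC n m y x (st, vis, cnt) (0, -1)) (-1, 0)).2.2
    E2.1 hsub2
  have hsub3 : ∀ p : Nat × Nat, pvVis vis0 p.1 p.2 = true →
      pvVis (floodStepA landC n m y x (floodStepA landC n m y x
        (floodStepA landC n m y x (st, vis, cnt) (0, -1)) (-1, 0)) (0, 1)).2.1 p.1 p.2 = true :=
    fun p hp => E3.2.1 p (hsub2 p hp)
  obtain ⟨E4, C4⟩ := floodStepA_spec G landC n m vis0 HC y x hone (1, 0)
    (Or.inr (Or.inr (Or.inr rfl)))
    (floodStepA landC n m y x (floodStepA landC n m y x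
      (floodStepA landC n m y x (st, vis, cnt) (0, -1)) (-1, 0)) (0, 1)).1
    (floodStepA landC n m y x (floodStepA landC n m y x
      (floodStepA landC n m y x (st, vis, cnt) (0, -1)) (-1, 0)) (0, 1)).2.1
    (floodStepA landC n m y x (floodStepA landC n m y x
      (floodStepA landC n m y x (st, vis, cnt) (0, -1)) (-1, 0)) (0, 1)).2.2
    E3.1 hsub3
  have hfold : dirsA.foldl (floodStepA landC n m y x) (st, vis, cnt)
      = floodStepA landC n m y x (floodStepA landC n m y x (floodStepA landC n m y x
          (floodStepA landC n m y x (st, vis, cnt) (0, -1)) (-1, 0)) (0, 1)) (1, 0) := rfl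
  rw [hfold]
  constructor
  · exact SRel_comp G n m (y, x) _ _ _ (SRel_comp G n m (y, x) _ _ _
      (SRel_comp G n m (y, x) _ _ _ E1 E2) E3) E4
  · intro e hadj
    obtain ⟨d, hdmem, ht1, ht2, hn1, hn2⟩ := adj_target G n m y x e hadj
    have hdm : d = (0, -1) ∨ d = (-1, 0) ∨ d = (0, 1) ∨ d = (1, 0) := by
      simpa [dirsA] using hdmem
    rcases hdm with rfl | rfl | rfl | rfl
    · exact E4.2.1 e (E3.2.1 e (E2.2.1 e (C1 e hadj ht1 ht2 hn1 hn2)))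
    · exact E4.2.1 e (E3.2.1 e (C2 e hadj ht1 ht2 hn1 hn2))
    · exact E4.2.1 e (C3 e hadj ht1 ht2 hn1 hn2)
    · exact C4 e hadj ht1 ht2 hn1 hn2

theorem floodA_done (G : List (List Int)) (n m : Nat) (vis0 : List (List Bool))
    (s : Nat × Nat) (HS : oneB G n m s = true)
    (HB : ∀ p : Nat × Nat, Relation.ReflTransGen (fun a b => adjB G n m a b = true) s p →
      pvVis vis0 p.1 p.2 = false)
    (cl : List (Nat × Nat)) (vis : List (List Bool)) (cnt : Int)
    (h2 : ∀ p : Nat × Nat, pvVis vis0 p.1 p.2 = true → pvVis vis p.1 p.2 = true)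
    (h3 : ∀ p : Nat × Nat, pvVis vis p.1 p.2 = true → pvVis vis0 p.1 p.2 = true ∨
      Relation.ReflTransGen (fun a b => adjB G n m a b = true) s p)
    (h4 : s ∈ cl)
    (h5 : ∀ p : Nat × Nat, (p ∈ cl ∨ p ∈ ([] : List (Nat × Nat))) ↔
      (pvVis vis p.1 p.2 = true ∧ pvVis vis0 p.1 p.2 = false))
    (h6 : ∀ p : Nat × Nat, pvVis vis p.1 p.2 = true → pvVis vis0 p.1 p.2 = false →
      p ∉ ([] : List (Nat × Nat)) → ∀ e, adjB G n m p e = true → pvVis vis e.1 e.2 = true)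
    (h7 : cnt = (((pvCells n m).countP
      (fun p => pvVis vis p.1 p.2 && !pvVis vis0 p.1 p.2) : Nat) : Int)) :
    (∀ p : Nat × Nat, pvVis vis p.1 p.2 = true ↔
      (pvVis vis0 p.1 p.2 = true ∨ reachB G n m (n * m) s p = true)) ∧
    (∀ p : Nat × Nat, p ∈ cl ↔ reachB G n m (n * m) s p = true) ∧
    cnt = (((pvCells n m).countP (fun p => reachB G n m (n * m) s p) : Nat) : Int) := by
  have hreach_vis : ∀ p : Nat × Nat,
      Relation.ReflTransGen (fun a b => adjB G n m a b = true) s p →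
      pvVis vis p.1 p.2 = true := by
    intro p hp
    induction hp with
    | refl => exact ((h5 s).mp (Or.inl h4)).1
    | @tail b e hb hadj ih =>
      exact h6 b ih (HB b hb) List.not_mem_nil e hadj
  have hvisIff : ∀ p : Nat × Nat, pvVis vis p.1 p.2 = true ↔
      (pvVis vis0 p.1 p.2 = true ∨ reachB G n m (n * m) s p = true) := by
    intro p
    constructor
    · intro hp
      rcases h3 p hp with h | h
      · exact Or.inl h
      · exact Or.inr (reachB_of_reachP G n m s p HS h)
    · intro hp
      rcases hp with h | h
      · exact h2 p h
      · exact hreach_vis p (reachP_of_reachB G n m (n * m) s p h)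
  constructor
  · exact hvisIff
  · constructor
    · intro p
      constructor
      · intro hp
        have hh := (h5 p).mp (Or.inl hp)
        rcases h3 p hh.1 with h | h
        · exact absurd h (by simp [hh.2])
        · exact reachB_of_reachP G n m s p HS h
      · intro hp
        have hP := reachP_of_reachB G n m (n * m) s p hp
        rcases (h5 p).mpr ⟨hreach_vis p hP, HB p hP⟩ with h | h
        · exact h
        · exact absurd h List.not_mem_nil
    · rw [h7]
      congr 1
      apply List.countP_congr
      intro p _
      simp only [Bool.and_eq_true, Bool.not_eq_eq_eq_not, Bool.not_true]
      constructor
      · intro hh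
        rcases h3 p hh.1 with h | h
        · exact absurd h (by simp [hh.2])
        · exact reachB_of_reachP G n m s p HS h
      · intro hh
        have hP := reachP_of_reachB G n m (n * m) s p hh
        exact ⟨hreach_vis p hP, HB p hP⟩


theorem floodA_main (G landC : List (List Int)) (n m : Nat) (vis0 : List (List Bool))
    (s : Nat × Nat) (HS : oneB G n m s = true)
    (HC : ∀ p : Nat × Nat, p.1 < n → p.2 < m → pvVis vis0 p.1 p.2 = false →
      pvGet landC p.1 p.2 = pvGet G p.1 p.2)
    (HB : ∀ p : Nat × Nat, Relation.ReflTransGen (fun a b => adjB G n m a b = true) s p →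
      pvVis vis0 p.1 p.2 = false) :
    ∀ (fuel : Nat) (stack cl : List (Nat × Nat)) (vis : List (List Bool)) (cnt : Int),
      vShape vis n m →
      (∀ p : Nat × Nat, pvVis vis0 p.1 p.2 = true → pvVis vis p.1 p.2 = true) →
      (∀ p : Nat × Nat, pvVis vis p.1 p.2 = true → pvVis vis0 p.1 p.2 = true ∨
        Relation.ReflTransGen (fun a b => adjB G n m a b = true) s p) →
      s ∈ cl →
      (∀ p : Nat × Nat, (p ∈ cl ∨ p ∈ stack) ↔
        (pvVis vis p.1 p.2 = true ∧ pvVis vis0 p.1 p.2 = false)) →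
      (∀ p : Nat × Nat, pvVis vis p.1 p.2 = true → pvVis vis0 p.1 p.2 = false → p ∉ stack →
        ∀ e, adjB G n m p e = true → pvVis vis e.1 e.2 = true) →
      cnt = (((pvCells n m).countP
        (fun p => pvVis vis p.1 p.2 && !pvVis vis0 p.1 p.2) : Nat) : Int) →
      stack.length + (pvCells n m).countP (fun p => !pvVis vis p.1 p.2) ≤ fuel →
      vShape (floodA landC n m fuel stack cl vis cnt).2.1 n m ∧
      (∀ p : Nat × Nat, pvVis (floodA landC n m fuel stack cl vis cnt).2.1 p.1 p.2 = true ↔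
        (pvVis vis0 p.1 p.2 = true ∨ reachB G n m (n * m) s p = true)) ∧
      (∀ p : Nat × Nat, p ∈ (floodA landC n m fuel stack cl vis cnt).1 ↔
        reachB G n m (n * m) s p = true) ∧
      (floodA landC n m fuel stack cl vis cnt).2.2
        = (((pvCells n m).countP (fun p => reachB G n m (n * m) s p) : Nat) : Int) := by
  intro fuel
  induction fuel with
  | zero =>
    intro stack cl vis cnt h1 h2 h3 h4 h5 h6 h7 h8
    have hstack : stack = [] := List.eq_nil_of_length_eq_zero (by omega)
    subst hstack
    obtain ⟨dv, dc, dcnt⟩ := floodA_done G n m vis0 s HS HB cl vis cnt h2 h3 h4 h5 h6 h7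
    exact ⟨h1, dv, dc, dcnt⟩
  | succ f ih =>
    intro stack cl vis cnt h1 h2 h3 h4 h5 h6 h7 h8
    cases stack with
    | nil =>
      obtain ⟨dv, dc, dcnt⟩ := floodA_done G n m vis0 s HS HB cl vis cnt h2 h3 h4 h5 h6 h7
      exact ⟨h1, dv, dc, dcnt⟩
    | cons c rest =>
      obtain ⟨y, x⟩ := c
      have hcvis := (h5 (y, x)).mp (Or.inr List.mem_cons_self)
      have hreachc : Relation.ReflTransGen (fun a b => adjB G n m a b = true) s (y, x) := by
        rcases h3 (y, x) hcvis.1 with h | h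
        · exact absurd h (by simp [hcvis.2])
        · exact h
      have honec := oneP_of_reach G n m s (y, x) HS hreachc
      obtain ⟨D, COV⟩ := floodDirs_spec G landC n m vis0 HC y x honec rest vis cnt h1 h2
      obtain ⟨sh', mono, newm, ssup, snew, cntrel, phirel⟩ := D
      have hstep : floodA landC n m (f + 1) ((y, x) :: rest) cl vis cnt
          = floodA landC n m f
              (dirsA.foldl (floodStepA landC n m y x) (rest, vis, cnt)).1
              (cl ++ [(y, x)])
              (dirsA.foldl (floodStepA landC n m y x) (rest, vis, cnt)).2.1
              (dirsA.foldl (floodStepA landC n m y x) (rest, vis, cnt)).2.2 := rfl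
      rw [hstep]
      have hsplit : (pvCells n m).countP (fun p =>
            pvVis (dirsA.foldl (floodStepA landC n m y x) (rest, vis, cnt)).2.1 p.1 p.2 &&
              !pvVis vis0 p.1 p.2)
          = (pvCells n m).countP (fun p => pvVis vis p.1 p.2 && !pvVis vis0 p.1 p.2)
            + (pvCells n m).countP (fun p =>
                pvVis (dirsA.foldl (floodStepA landC n m y x) (rest, vis, cnt)).2.1 p.1 p.2 &&
                  !pvVis vis p.1 p.2) := by
        rw [← countP_or_disjoint _ _ _ (by
          intro p _ hcon
          obtain ⟨hl, hr⟩ := hcon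
          simp only [Bool.and_eq_true, Bool.not_eq_eq_eq_not, Bool.not_true] at hl hr
          exact absurd hl.1 (by simp [hr.2]))]
        apply List.countP_congr
        intro p _
        simp only [Bool.and_eq_true, Bool.or_eq_true, Bool.not_eq_eq_eq_not, Bool.not_true]
        constructor
        · intro hh
          by_cases hbv : pvVis vis p.1 p.2 = true
          · exact Or.inl ⟨hbv, hh.2⟩
          · exact Or.inr ⟨hh.1, by simpa using hbv⟩
        · intro hh
          rcases hh with ⟨hv, hnv⟩ | ⟨hv, hnv⟩
          · exact ⟨mono p hv, hnv⟩
          · refine ⟨hv, ?_⟩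
            by_cases hav : pvVis vis0 p.1 p.2 = true
            · exact absurd (h2 p hav) (by simp [hnv])
            · simpa using hav
      apply ih _ _ _ _ sh' (fun p hp => mono p (h2 p hp)) ?_ (List.mem_append_left _ h4)
        ?_ ?_ ?_ ?_
      · intro p hp
        rcases newm p hp with hp2 | ⟨hadj, _⟩
        · exact h3 p hp2
        · exact Or.inr (hreachc.tail hadj)
      · intro p
        constructor
        · intro hp
          rcases hp with hp | hp
          · rcases List.mem_append.mp hp with hp | hp
            · have hh := (h5 p).mp (Or.inl hp)
              exact ⟨mono p hh.1, hh.2⟩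
            · have hpc : p = (y, x) := by simpa using hp
              subst hpc
              exact ⟨mono _ hcvis.1, hcvis.2⟩
          · rcases snew p hp with hp2 | ⟨hv, hnv⟩
            · have hh := (h5 p).mp (Or.inr (List.mem_cons_of_mem _ hp2))
              exact ⟨mono p hh.1, hh.2⟩
            · refine ⟨hv, ?_⟩
              by_cases hav : pvVis vis0 p.1 p.2 = true
              · exact absurd (h2 p hav) (by simp [hnv])
              · simpa using hav
        · intro hp
          obtain ⟨hv, hnv0⟩ := hp
          rcases newm p hv with hvp | ⟨hadj, hmem⟩
          · rcases (h5 p).mpr ⟨hvp, hnv0⟩ with hcl | hst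
            · exact Or.inl (List.mem_append_left _ hcl)
            · rcases List.mem_cons.mp hst with rfl | hst
              · exact Or.inl (List.mem_append_right _ List.mem_cons_self)
              · exact Or.inr (ssup p hst)
          · exact Or.inr hmem
      · intro p hvp hnv0 hnst e hadj
        rcases newm p hvp with hvo | ⟨hadjc, hmem⟩
        · by_cases hpc : p = (y, x)
          · subst hpc
            exact COV e hadj
          · by_cases hpr : p ∈ rest
            · exact absurd (ssup p hpr) hnst
            · refine mono e (h6 p hvo hnv0 ?_ e hadj)
              intro hcon
              rcases List.mem_cons.mp hcon with h | h
              · exact hpc h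
              · exact hpr h
        · exact absurd hmem hnst
      · have cntrel' : (dirsA.foldl (floodStepA landC n m y x) (rest, vis, cnt)).2.2
            = cnt + (((pvCells n m).countP (fun p =>
                pvVis (dirsA.foldl (floodStepA landC n m y x) (rest, vis, cnt)).2.1 p.1 p.2 &&
                !pvVis vis p.1 p.2) : Nat) : Int) := cntrel
        rw [cntrel', hsplit, h7]
        push_cast
        ring
      · have phirel' : (dirsA.foldl (floodStepA landC n m y x) (rest, vis, cnt)).1.length
              + (pvCells n m).countP (fun p =>
                  !pvVis (dirsA.foldl (floodStepA landC n m y x) (rest, vis, cnt)).2.1 p.1 p.2)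
            = rest.length + (pvCells n m).countP (fun p => !pvVis vis p.1 p.2) := phirel
        rw [List.length_cons] at h8
        omega

theorem setFold_shape (n m : Nat) (v : Int) :
    ∀ (l : List (Nat × Nat)) (g : List (List Int)), gShape g n m →
      gShape (l.foldl (fun g p => pvSet g p.1 p.2 v) g) n m := by
  intro l
  induction l with
  | nil => intro g hg; exact hg
  | cons a t ih => intro g hg; exact ih _ (gShape_set g n m hg a.1 a.2 v)

theorem setFold_get (n m : Nat) (v : Int) :
    ∀ (l : List (Nat × Nat)), (∀ p ∈ l, p.1 < n ∧ p.2 < m) →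
      ∀ (g : List (List Int)), gShape g n m → ∀ i j, i < n → j < m →
      pvGet (l.foldl (fun g p => pvSet g p.1 p.2 v) g) i j
        = if (i, j) ∈ l then v else pvGet g i j := by
  intro l
  induction l with
  | nil => intro _ g _ i j _ _; simp
  | cons a t ih =>
    intro hsub g hg i j hi hj
    rw [List.foldl_cons, ih (fun p hp => hsub p (List.mem_cons_of_mem _ hp)) _
      (gShape_set g n m hg a.1 a.2 v) i j hi hj]
    by_cases hmem : (i, j) ∈ t
    · rw [if_pos hmem, if_pos (List.mem_cons_of_mem _ hmem)]
    · rw [if_neg hmem]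
      by_cases hx : a = (i, j)
      · subst hx
        rw [pvGet_set_eq g n m hg i j hi hj v, if_pos List.mem_cons_self]
      · rw [pvGet_set_ne g a.1 a.2 v i j (fun hcon => hx (Prod.ext hcon.1 hcon.2)),
          if_neg ?_]
        intro hcon
        rcases List.mem_cons.mp hcon with h | h
        · exact hx h.symm
        · exact hmem h

-- outer-loop invariant of A: visited = union of whole components, grid rewritten on visited
def OInvA (G : List (List Int)) (n m : Nat) (g : List (List Int))
    (vis : List (List Bool)) : Prop :=
  gShape g n m ∧ vShape vis n m ∧
  (∀ p : Nat × Nat, pvVis vis p.1 p.2 = true → oneB G n m p = true) ∧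
  (∀ p e : Nat × Nat, pvVis vis p.1 p.2 = true →
    Relation.ReflTransGen (fun a b => adjB G n m a b = true) p e →
    pvVis vis e.1 e.2 = true) ∧
  (∀ i j, i < n → j < m → pvGet g i j =
    if pvVis vis i j = true then specVal G n m (i, j) else pvGet G i j)

theorem seedStepA_spec (G : List (List Int)) (n m : Nat) (g : List (List Int))
    (vis : List (List Bool)) (c : Nat × Nat) (hc : c.1 < n ∧ c.2 < m)
    (hO : OInvA G n m g vis) :
    OInvA G n m (seedStepA n m (g, vis) c).1 (seedStepA n m (g, vis) c).2 ∧
    (oneB G n m c = true → pvVis (seedStepA n m (g, vis) c).2 c.1 c.2 = true) ∧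
    (∀ p : Nat × Nat, pvVis vis p.1 p.2 = true →
      pvVis (seedStepA n m (g, vis) c).2 p.1 p.2 = true) := by
  obtain ⟨O1, O2, O3, O4, O5⟩ := hO
  unfold seedStepA
  by_cases hgd : pvGet g c.1 c.2 = 1 ∧ pvVis vis c.1 c.2 = false
  · rw [if_pos hgd]
    have hG1 : pvGet G c.1 c.2 = 1 := by
      have := O5 c.1 c.2 hc.1 hc.2
      rw [hgd.2] at this
      simp at this
      rw [← this]
      exact hgd.1
    have HS : oneB G n m c = true := by
      simp only [oneB, Bool.and_eq_true, decide_eq_true_eq]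
      exact ⟨⟨hc.1, hc.2⟩, hG1⟩
    have HB : ∀ p : Nat × Nat,
        Relation.ReflTransGen (fun a b => adjB G n m a b = true) c p →
        pvVis vis p.1 p.2 = false := by
      intro p hp
      by_cases hv : pvVis vis p.1 p.2 = true
      · have hsym := Relation.ReflTransGen.symmetric
          (fun a b hab => adj_symm G n m a b hab) hp
        exact absurd (O4 p c hv hsym) (by simp [hgd.2])
      · simpa using hv
    have HC : ∀ p : Nat × Nat, p.1 < n → p.2 < m → pvVis vis p.1 p.2 = false →
        pvGet g p.1 p.2 = pvGet G p.1 p.2 := by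
      intro p h1 h2 h3
      have := O5 p.1 p.2 h1 h2
      rw [h3] at this
      simpa using this
    -- initial invariants for the flood call
    have hvse : pvVis (pvVisSet vis c.1 c.2) c.1 c.2 = true :=
      pvVis_visSet_eq vis n m O2 c.1 c.2 hc.1 hc.2
    have hvsne : ∀ p : Nat × Nat, p ≠ c →
        pvVis (pvVisSet vis c.1 c.2) p.1 p.2 = pvVis vis p.1 p.2 := by
      intro p hp
      exact pvVis_visSet_ne vis c.1 c.2 p.1 p.2
        (fun hcon => hp (Prod.ext hcon.1.symm hcon.2.symm))
    have hcount1 : (pvCells n m).countP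
        (fun p => pvVis (pvVisSet vis c.1 c.2) p.1 p.2 && !pvVis vis p.1 p.2) = 1 := by
      rw [List.countP_congr (q := fun p => decide (c = p)) ?_]
      · exact countP_single_of_nodup _ (nodup_pvCells n m) c
          ((mem_pvCells n m c).mpr hc)
      · intro p _
        simp only [Bool.and_eq_true, Bool.not_eq_eq_eq_not, Bool.not_true, decide_eq_true_eq]
        constructor
        · intro hh
          by_contra hne
          rw [hvsne p (fun hcon => hne hcon.symm)] at hh
          simp [hh.2] at hh
        · intro hh
          rw [← hh]
          exact ⟨hvse, hgd.2⟩
    obtain ⟨Fsh, Fvis, Fcl, Fcnt⟩ := floodA_main G g n m vis c HS HC HB (n * m + 1)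
      [c] [c] (pvVisSet vis c.1 c.2) 1
      (vShape_visSet vis n m O2 c.1 c.2)
      (by
        intro p hp
        by_cases hpe : p = c
        · subst hpe; exact hvse
        · rw [hvsne p hpe]; exact hp)
      (by
        intro p hp
        by_cases hpe : p = c
        · subst hpe; exact Or.inr Relation.ReflTransGen.refl
        · rw [hvsne p hpe] at hp; exact Or.inl hp)
      List.mem_cons_self
      (by
        intro p
        constructor
        · intro hp
          have hpc : p = c := by
            rcases hp with hp | hp <;> simpa using hp
          subst hpc
          exact ⟨hvse, hgd.2⟩
        · intro hp
          by_cases hpe : p = c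
          · subst hpe; exact Or.inl List.mem_cons_self
          · rw [hvsne p hpe] at hp
            exact absurd hp.1 (by simp [hp.2]))
      (by
        intro p hv hnv hns e hadj
        exfalso
        by_cases hpe : p = c
        · subst hpe; exact hns List.mem_cons_self
        · rw [hvsne p hpe] at hv
          exact absurd hv (by simp [hnv]))
      (by rw [hcount1]; norm_num)
      (by
        have := List.countP_le_length
          (l := pvCells n m) (p := fun p => !pvVis (pvVisSet vis c.1 c.2) p.1 p.2)
        rw [length_pvCells] at this
        simp only [List.length_cons, List.length_nil]
        omega)
    -- the grid rewrite
    have hclbox : ∀ p ∈ (floodA g n m (n * m + 1) [c] [c] (pvVisSet vis c.1 c.2) 1).1,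
        p.1 < n ∧ p.2 < m := by
      intro p hp
      have hr := (Fcl p).mp hp
      rcases reachB_box G n m (n * m) c p hr with h | h
      · rw [h]; exact hc
      · have := one_box G n m p h
        exact ⟨this.1, this.2.1⟩
    refine ⟨⟨setFold_shape n m _ _ g O1, Fsh, ?_, ?_, ?_⟩, ?_, ?_⟩
    · intro p hp
      rcases (Fvis p).mp hp with h | h
      · exact O3 p h
      · exact oneP_of_reach G n m c p HS (reachP_of_reachB G n m (n * m) c p h)
    · intro p e hp hpe
      rcases (Fvis p).mp hp with h | h
      · exact (Fvis e).mpr (Or.inl (O4 p e h hpe))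
      · refine (Fvis e).mpr (Or.inr ?_)
        exact reachB_of_reachP G n m c e HS
          ((reachP_of_reachB G n m (n * m) c p h).trans hpe)
    · intro i j hi hj
      rw [setFold_get n m _ _ hclbox g O1 i j hi hj]
      by_cases hmem : (i, j) ∈ (floodA g n m (n * m + 1) [c] [c] (pvVisSet vis c.1 c.2) 1).1
      · rw [if_pos hmem]
        have hr := (Fcl (i, j)).mp hmem
        have hone_ij : oneB G n m (i, j) = true :=
          oneP_of_reach G n m c (i, j) HS (reachP_of_reachB G n m (n * m) c (i, j) hr)
        have hvis' : pvVis (floodA g n m (n * m + 1) [c] [c]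
            (pvVisSet vis c.1 c.2) 1).2.1 i j = true := (Fvis (i, j)).mpr (Or.inr hr)
        rw [hvis', if_pos rfl, Fcnt]
        unfold specVal
        rw [if_pos hone_ij]
        congr 1
        apply List.countP_congr
        intro q _
        constructor
        · intro hq
          exact reachB_transT G n m (i, j) c q hone_ij
            (reachB_symmT G n m c (i, j) HS hr) hq
        · intro hq
          exact reachB_transT G n m c (i, j) q HS hr hq
      · rw [if_neg hmem]
        have hnr : reachB G n m (n * m) c (i, j) ≠ true := fun h => hmem ((Fcl (i, j)).mpr h)
        have hvv : pvVis (floodA g n m (n * m + 1) [c] [c]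
            (pvVisSet vis c.1 c.2) 1).2.1 i j = pvVis vis i j := by
          by_cases hv : pvVis vis i j = true
          · rw [hv]; exact (Fvis (i, j)).mpr (Or.inl hv)
          · by_cases hv' : pvVis (floodA g n m (n * m + 1) [c] [c]
                (pvVisSet vis c.1 c.2) 1).2.1 i j = true
            · rcases (Fvis (i, j)).mp hv' with h | h
              · exact absurd h hv
              · exact absurd h hnr
            · rw [Bool.not_eq_true] at hv hv'
              rw [hv, hv']
        rw [hvv]
        exact O5 i j hi hj
    · intro _
      exact (Fvis c).mpr (Or.inr (reachB_self G n m (n * m) c))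
    · intro p hp
      exact (Fvis p).mpr (Or.inl hp)
  · rw [if_neg hgd]
    refine ⟨⟨O1, O2, O3, O4, O5⟩, ?_, fun p hp => hp⟩
    intro honc
    by_cases hv : pvVis vis c.1 c.2 = true
    · exact hv
    · exfalso
      apply hgd
      have hob := one_box G n m c honc
      have h5c := O5 c.1 c.2 hc.1 hc.2
      rw [if_neg hv] at h5c
      constructor
      · rw [h5c]
        exact hob.2.2
      · simpa using hv

theorem outerA (G : List (List Int)) (n m : Nat) :
    ∀ (l : List (Nat × Nat)) (g : List (List Int)) (vis : List (List Bool)),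
      (∀ p ∈ l, p.1 < n ∧ p.2 < m) → OInvA G n m g vis →
      OInvA G n m (l.foldl (seedStepA n m) (g, vis)).1 (l.foldl (seedStepA n m) (g, vis)).2 ∧
      (∀ c ∈ l, oneB G n m c = true →
        pvVis (l.foldl (seedStepA n m) (g, vis)).2 c.1 c.2 = true) ∧
      (∀ p : Nat × Nat, pvVis vis p.1 p.2 = true →
        pvVis (l.foldl (seedStepA n m) (g, vis)).2 p.1 p.2 = true) := by
  intro l
  induction l with
  | nil => intro g vis _ hO; exact ⟨hO, by simp, fun p hp => hp⟩
  | cons a t ih =>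
    intro g vis hsub hO
    obtain ⟨hO1, hseed, hmono⟩ := seedStepA_spec G n m g vis a
      (hsub a List.mem_cons_self) hO
    have hfold : (a :: t).foldl (seedStepA n m) (g, vis)
        = t.foldl (seedStepA n m) ((seedStepA n m (g, vis) a).1,
            (seedStepA n m (g, vis) a).2) := rfl
    rw [hfold]
    obtain ⟨R1, R2, R3⟩ := ih (seedStepA n m (g, vis) a).1 (seedStepA n m (g, vis) a).2
      (fun p hp => hsub p (List.mem_cons_of_mem _ hp)) hO1
    refine ⟨R1, ?_, fun p hp => R3 p (hmono p hp)⟩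
    intro c hcmem honc
    rcases List.mem_cons.mp hcmem with rfl | hcmem
    · exact R3 c (hseed honc)
    · exact R2 c hcmem honc

theorem gridA_spec (land : List (List Int)) (hpre : Pre_solution land) :
    ∀ i j, i < land.length → j < (land.headD []).length →
      pvGet ((pvCells land.length (land.headD []).length).foldl
        (seedStepA land.length (land.headD []).length)
        (land, List.replicate land.length (List.replicate (land.headD []).length false))).1 i j
      = specVal land land.length (land.headD []).length (i, j) := by
  intro i j hi hj
  have hO0 : OInvA land land.length (land.headD []).length land
      (List.replicate land.length (List.replicate (land.headD []).length false)) := by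
    refine ⟨⟨rfl, fun row hr => hpre.2 row hr⟩,
      vShape_replicate land.length (land.headD []).length, ?_, ?_, ?_⟩
    · intro p hp
      rw [pvVis_replicate] at hp
      simp at hp
    · intro p e hp _
      rw [pvVis_replicate] at hp
      simp at hp
    · intro a b _ _
      rw [pvVis_replicate]
      simp
  obtain ⟨RO, Rall, -⟩ := outerA land land.length (land.headD []).length
    (pvCells land.length (land.headD []).length) land
    (List.replicate land.length (List.replicate (land.headD []).length false))
    (fun p hp => (mem_pvCells _ _ p).mp hp) hO0
  obtain ⟨-, -, F3, -, F5⟩ := RO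
  rw [F5 i j hi hj]
  by_cases h1 : pvGet land i j = 1
  · have hone : oneB land land.length (land.headD []).length (i, j) = true := by
      simp only [oneB, Bool.and_eq_true, decide_eq_true_eq]
      exact ⟨⟨hi, hj⟩, h1⟩
    have hm : (i, j) ∈ pvCells land.length (land.headD []).length :=
      (mem_pvCells land.length (land.headD []).length (i, j)).mpr ⟨hi, hj⟩
    rw [if_pos (Rall (i, j) hm hone)]
  · have hnone : ¬ oneB land land.length (land.headD []).length (i, j) = true := by
      simp [oneB, h1]
    have hv : ¬ pvVis ((pvCells land.length (land.headD []).length).foldl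
        (seedStepA land.length (land.headD []).length)
        (land, List.replicate land.length
          (List.replicate (land.headD []).length false))).2 i j = true :=
      fun hv => hnone (F3 (i, j) hv)
    rw [if_neg hv]
    unfold specVal
    rw [if_neg hnone]

theorem gridB_spec (land : List (List Int)) (hpre : Pre_solution land) :
    ∀ i j, i < land.length → j < (land.headD []).length →
      pvGet ((pvCells land.length (land.headD []).length).foldl (fun g c =>
        if pvGet g c.1 c.2 = 1 then
          pvSet g c.1 c.2
            ((countsB land
                (loopB land land.length (land.headD []).length
                  (land.length * (land.headD []).length)
                  (initLabelB land land.length (land.headD []).length))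
                land.length (land.headD []).length).getD
              (pvGet (loopB land land.length (land.headD []).length
                  (land.length * (land.headD []).length)
                  (initLabelB land land.length (land.headD []).length)) c.1 c.2) 0)
        else g) land) i j
      = specVal land land.length (land.headD []).length (i, j) := by
  intro i j hi hj
  exact gridB_main land land.length (land.headD []).length
    ⟨rfl, fun row hr => hpre.2 row hr⟩ i j hi hj

-- ===== VERDICT (by name: the statement is the Claim_ definition above) =====
theorem solution_spec : Claim_equal_solution := by
  intro land _ hpre
  unfold Spec_solution solution solution_alt
  have hd : land.getD 0 [] = land.headD [] := by cases land <;> rfl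
  rw [hd]
  refine scan_congr _ _ _ _ ?_ ?_
  · rcases land with _ | _ <;> simp_all [Pre_solution]
  · intro i j hi hj
    rw [gridA_spec land hpre i j hi hj, gridB_spec land hpre i j hi hj]
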